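-- pv_equiv track=rewrite | github.com/jakubwiedemann/rnaloops | Commons/SecondaryStructureTools.py | fill_secondary
-- ===== SOURCE A (Python) =====
-- def find_matching_char(char, text, initial_position):
--     openList = ["[","{","<","A","B","C","D","E"]
--     closeList = ["]","}",">","a","b","c","d","e"]
--     if char in openList:
--         openChar = char
--         closeChar = closeList[openList.index(openChar)]
--         char_position = initial_position
--         counter = 1
--         while counter > 0:
--             char_position += 1
--             char = text[char_position]
--             if char == openChar:
--                 counter += 1
--             if char == closeChar:
--                 counter -= 1
--     elif char in closeList:
--         closeChar = char
--         openChar = openList[closeList.index(closeChar)]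
--         char_position = initial_position
--         counter = 1
--         while counter > 0:
--             char_position -= 1
--             char = text[char_position]
--             if char == closeChar:
--                 counter += 1
--             if char == openChar:
--                 counter -= 1
--     else:
--         char_position = initial_position
--
--     return char_position
--
-- def fill_secondary(conectors, text):
--     connectors_ss = []
--     chars = ['.','(',')']
--     for connector in conectors:
--         if connector[1]-1 == connector[0]+1:
--             return connectors_ss, text
--         else:
--             for nucl_no in range(connector[0]+1,connector[1]-1):
--                 if text[nucl_no] not in chars:
--                     paired_bracket_loc = find_matching_char(text[nucl_no], text, nucl_no)
--                     if all(paired_bracket_loc not in range(pair[0],pair[1]) for pair in conectors):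
--                         text = text[:nucl_no] + '.' + text[nucl_no+1:]
--                         text = text[:paired_bracket_loc] + '.' + text[paired_bracket_loc+1:]
--             connectors_ss.append(text[connector[0]:connector[1]])
--     return connectors_ss, text
-- ===== SOURCE B (Python) =====
-- def fill_secondary(conectors, text):
--     OPEN = "[{<ABCDE"
--     CLOSE = "]}>abcde"
--     OPEN_OF = dict(zip(CLOSE, OPEN))
--     # one stack-based pass: mate[i] = position of the bracket matching position i
--     mate = {}
--     stacks = {o: [] for o in OPEN}
--     for i, ch in enumerate(text):
--         if ch in stacks:
--             stacks[ch].append(i)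
--         elif ch in OPEN_OF:
--             s = stacks[OPEN_OF[ch]]
--             if s:
--                 p = s.pop()
--                 mate[p] = i
--                 mate[i] = p
--     buf = list(text)
--     connectors_ss = []
--     chars = ('.', '(', ')')
--     for a, b in conectors:
--         if b - 1 == a + 1:
--             return connectors_ss, ''.join(buf)
--         for i in range(a + 1, b - 1):
--             ch = buf[i]
--             if ch in chars:
--                 continue
--             if ch in stacks or ch in OPEN_OF:
--                 j = mate[i]  # KeyError on an unmatched bracket (A raises or wanders there)
--                 if all(not (p0 <= j < p1) for p0, p1 in conectors):
--                     buf[i] = '.'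
--                     buf[j] = '.'
--         connectors_ss.append(''.join(buf[a:b]))
--     return connectors_ss, ''.join(buf)
-- ===== Notes on version B (the rewrite author's own statement) =====
-- stated objective: faster
-- what changed: A re-scans the text character by character (find_matching_char) for every bracket it meets and rebuilds the whole string for every replacement; B finds all matching-bracket positions once in a single stack-based pass and then answers each lookup in O(1), editing a mutable character buffer.
-- outside the precondition, e.g. on fill_secondary([(1, 4)], '.b><'): A returns (['b..'], '.b...b.<'), B raises KeyError; on fill_secondary([(-2, 1)], 'y}>..x[(){'): A returns ([''], 'y.>..x[().y}>..x[(){'), B raises KeyError; on fill_secondary([(0, 3), (10, 3)], '[><.B<bb>{'): A returns (['[..', ''], '[...B<bb>{'), B raises KeyError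
import Mathlib
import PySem

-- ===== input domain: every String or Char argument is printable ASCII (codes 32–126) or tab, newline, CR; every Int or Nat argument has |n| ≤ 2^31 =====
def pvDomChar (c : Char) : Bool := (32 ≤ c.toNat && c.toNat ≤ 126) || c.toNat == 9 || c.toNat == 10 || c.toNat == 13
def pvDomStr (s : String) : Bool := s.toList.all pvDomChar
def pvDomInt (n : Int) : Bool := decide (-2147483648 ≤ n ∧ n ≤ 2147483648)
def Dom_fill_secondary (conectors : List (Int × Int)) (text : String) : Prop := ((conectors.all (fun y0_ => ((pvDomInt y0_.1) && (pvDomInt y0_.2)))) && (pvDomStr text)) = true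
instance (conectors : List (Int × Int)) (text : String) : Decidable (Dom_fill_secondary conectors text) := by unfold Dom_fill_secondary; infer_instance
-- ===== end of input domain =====

-- B replaces A's per-bracket linear scans (find_matching_char) by ONE stack-based pass that
-- precomputes every matching-bracket position, then looks partners up in O(1); return values
-- agree on Pre_ (objective: faster).

-- ===== PORT A =====
def fmcOpenList : List Char := ['[', '{', '<', 'A', 'B', 'C', 'D', 'E']
def fmcCloseList : List Char := [']', '}', '>', 'a', 'b', 'c', 'd', 'e']

-- the forward 'while counter > 0' loop of find_matching_char; fuel only bounds the recursion
-- (inside Pre_ every scan finds its partner well within it); where Python raises IndexError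
-- (pyGet? = none) the port stops with the current position — those inputs are outside Pre_.
def fmcScanF (text : List Char) (openChar closeChar : Char) : Nat → Int → Int → Int
  | 0, char_position, _ => char_position
  | fuel + 1, char_position, counter =>
    if counter > 0 then
      let pos' := char_position + 1
      match PySem.List.pyGet? text pos' with
      | none => pos'
      | some ch =>
        let counter := counter + (if ch = openChar then 1 else 0)
        let counter := counter - (if ch = closeChar then 1 else 0)
        fmcScanF text openChar closeChar fuel pos' counter
    else char_position

-- the backward 'while counter > 0' loop (closing bracket: scan to the left)
def fmcScanB (text : List Char) (openChar closeChar : Char) : Nat → Int → Int → Int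
  | 0, char_position, _ => char_position
  | fuel + 1, char_position, counter =>
    if counter > 0 then
      let pos' := char_position - 1
      match PySem.List.pyGet? text pos' with
      | none => pos'
      | some ch =>
        let counter := counter + (if ch = closeChar then 1 else 0)
        let counter := counter - (if ch = openChar then 1 else 0)
        fmcScanB text openChar closeChar fuel pos' counter
    else char_position

-- closeList[openList.index(openChar)]: the index exists (membership was just checked) and is a
-- nonnegative list position, so index?.getD 0 / pyGetD are exact here.
def find_matching_char (char : Char) (text : List Char) (initial_position : Int) : Int :=
  if fmcOpenList.contains char then
    let closeChar := PySem.List.pyGetD fmcCloseList ((PySem.List.index? fmcOpenList char).getD 0 : Int) ' '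
    fmcScanF text char closeChar (2 * text.length + 2) initial_position 1
  else if fmcCloseList.contains char then
    let openChar := PySem.List.pyGetD fmcOpenList ((PySem.List.index? fmcCloseList char).getD 0 : Int) ' '
    fmcScanB text openChar char (2 * text.length + 2) initial_position 1
  else initial_position

-- body of A's inner 'for nucl_no in range(...)' loop; text[:k] + '.' + text[k+1:] is the two slices
def fsAStep (conectors : List (Int × Int)) (text : List Char) (nucl_no : Int) : List Char :=
  match PySem.List.pyGet? text nucl_no with
  | none => text    -- Python raises IndexError here; outside Pre_
  | some ch =>
    if ['.', '(', ')'].contains ch then text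
    else
      let paired_bracket_loc := find_matching_char ch text nucl_no
      if conectors.all (fun pair => decide (¬ (pair.1 ≤ paired_bracket_loc ∧ paired_bracket_loc < pair.2))) then
        let text := PySem.List.slice text none (some nucl_no) ++ '.' :: PySem.List.slice text (some (nucl_no + 1)) none
        PySem.List.slice text none (some paired_bracket_loc) ++ '.' :: PySem.List.slice text (some (paired_bracket_loc + 1)) none
      else text
    -- (when the if-guard fails Python does nothing)

-- A's outer 'for connector in conectors' loop with its early 'return connectors_ss, text'
def fsALoop (conectors : List (Int × Int)) : List (Int × Int) → List String → List Char → List String × String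
  | [], connectors_ss, text => (connectors_ss, String.ofList text)
  | connector :: rest, connectors_ss, text =>
    if connector.2 - 1 = connector.1 + 1 then (connectors_ss, String.ofList text)
    else
      let text' := (PySem.List.pyRange (connector.1 + 1) (connector.2 - 1) 1).foldl (fsAStep conectors) text
      fsALoop conectors rest (connectors_ss ++ [String.ofList (PySem.List.slice text' (some connector.1) (some connector.2))]) text'

def fill_secondary (conectors : List (Int × Int)) (text : String) : List String × String :=
  fsALoop conectors conectors [] text.toList

-- ===== PORT B =====
-- Source B's OPEN / CLOSE are the same character lists as A's openList / closeList,
-- so the port reuses fmcOpenList / fmcCloseList for them.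

-- OPEN_OF = dict(zip(CLOSE, OPEN))
def fsbOpenOf : PySem.Dict Char Char :=
  (fmcCloseList.zip fmcOpenList).foldl (fun d p => d.insert p.1 p.2) PySem.Dict.empty

-- stks = {o: [] for o in OPEN}
def fsbStacks0 : PySem.Dict Char (List Int) :=
  fmcOpenList.foldl (fun d o => d.insert o []) PySem.Dict.empty

-- body of B's matching pass: push openers, pop (s.pop() = last element) on a closer and record both
def fsbBuildStep (st : PySem.Dict Int Int × PySem.Dict Char (List Int)) (p : Int × Char) :
    PySem.Dict Int Int × PySem.Dict Char (List Int) :=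
  match st, p with
  | (mate, stks), (i, ch) =>
  if stks.contains ch then
    (mate, stks.insert ch (stks.getD ch [] ++ [i]))
  else
    match fsbOpenOf.get? ch with
    | some oc =>
      let s := stks.getD oc []
      match s.getLast? with
      | some pp => ((mate.insert pp i).insert i pp, stks.insert oc s.dropLast)
      | none => st
    | none => st

-- body of B's inner loop: O(1) table lookup instead of A's scan; buf[k] = '.' is pySetD
def fsbStep (conectors : List (Int × Int)) (mate : PySem.Dict Int Int)
    (stks : PySem.Dict Char (List Int)) (buf : List Char) (i : Int) : List Char :=
  match PySem.List.pyGet? buf i with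
  | none => buf    -- Python raises IndexError here; outside Pre_
  | some ch =>
    if ['.', '(', ')'].contains ch then buf
    else if stks.contains ch || fsbOpenOf.contains ch then
      match mate.get? i with
      | none => buf    -- Python raises KeyError here (unmatched bracket); outside Pre_
      | some j =>
        if conectors.all (fun p => decide (¬ (p.1 ≤ j ∧ j < p.2))) then
          PySem.List.pySetD (PySem.List.pySetD buf i '.') j '.'
        else buf
    else buf

-- B's outer loop; ''.join(buf[a:b]) of a char list is String.ofList of the slice
def fsbLoop (conectors : List (Int × Int)) (mate : PySem.Dict Int Int)
    (stks : PySem.Dict Char (List Int)) :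
    List (Int × Int) → List String → List Char → List String × String
  | [], connectors_ss, buf => (connectors_ss, String.ofList buf)
  | (a, b) :: rest, connectors_ss, buf =>
    if b - 1 = a + 1 then (connectors_ss, String.ofList buf)
    else
      let buf' := (PySem.List.pyRange (a + 1) (b - 1) 1).foldl (fsbStep conectors mate stks) buf
      fsbLoop conectors mate stks rest (connectors_ss ++ [String.ofList (PySem.List.slice buf' (some a) (some b))]) buf'

def fill_secondary_alt (conectors : List (Int × Int)) (text : String) : List String × String :=
  let mst := (PySem.List.enumerate text.toList 0).foldl fsbBuildStep (PySem.Dict.empty, fsbStacks0)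
  fsbLoop conectors mst.1 mst.2 conectors [] text.toList

-- ===== PRECONDITION & SPEC =====
-- prefix bracket count: #openers − #closers of one bracket type among the first k characters
def pvCnt (o c : Char) (t : List Char) (k : Nat) : Int :=
  ((t.take k).count o : Int) - ((t.take k).count c : Int)

-- one bracket type is balanced: no prefix closes more than it opened, and totals agree
def pvBalancedB (o c : Char) (t : List Char) : Bool :=
  (List.range (t.length + 1)).all (fun k => decide (0 ≤ pvCnt o c t k)) && (pvCnt o c t t.length == 0)

def pvPairs : List (Char × Char) :=
  [('[', ']'), ('{', '}'), ('<', '>'), ('A', 'a'), ('B', 'b'), ('C', 'c'), ('D', 'd'), ('E', 'e')]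

-- a bracket type is relevant if one of its two characters occurs at an in-range position inside
-- some connector's interior range(a+1, b-1) — only such types are ever scanned
def pvRelevantB (conectors : List (Int × Int)) (t : List Char) (pr : Char × Char) : Bool :=
  conectors.any (fun p => (List.range t.length).any (fun i =>
    decide (p.1 + 1 ≤ (i : Int)) && decide ((i : Int) < p.2 - 1) &&
    (t.getD i ' ' == pr.1 || t.getD i ' ' == pr.2)))

-- Pre_ excludes connectors with a nonempty interior sticking out of the text and texts where a
-- bracket type occurring in a connector interior is unbalanced: there A's scan raises IndexError
-- or walks through Python's negative-index wraparound, and B's table lookup raises KeyError.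
def Pre_fill_secondary (conectors : List (Int × Int)) (text : String) : Prop :=
  (∀ p ∈ conectors, p.1 + 3 ≤ p.2 → 0 ≤ p.1 ∧ p.2 ≤ (text.toList.length : Int)) ∧
  (∀ pr ∈ pvPairs, pvRelevantB conectors text.toList pr = true → pvBalancedB pr.1 pr.2 text.toList = true)

instance (conectors : List (Int × Int)) (text : String) : Decidable (Pre_fill_secondary conectors text) := by
  unfold Pre_fill_secondary; infer_instance

def pvWitness_fill_secondary : (List (Int × Int)) × String := ([(0, 5)], "(A.a)")

def Spec_fill_secondary (conectors : List (Int × Int)) (text : String) (out : List String × String) : Prop :=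
  out = fill_secondary_alt conectors text
instance (conectors : List (Int × Int)) (text : String) (out : List String × String) : Decidable (Spec_fill_secondary conectors text out) := by
  unfold Spec_fill_secondary; infer_instance

-- ===== CLAIM (what is proved, stated in full; the proofs are below) =====
def Claim_equal_fill_secondary : Prop := ∀ (conectors : List (Int × Int)) (text : String), Dom_fill_secondary conectors text → Pre_fill_secondary conectors text → Spec_fill_secondary conectors text (fill_secondary conectors text)

-- ===== LEMMAS AND PROOFS =====

-- ---- generic discrete walk lemmas ----
-- a walk that never falls by more than 1 and ends at or below v passes through v
theorem pvIvtDown (f : Nat → Int) (hstep : ∀ k, f k - 1 ≤ f (k + 1)) :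
    ∀ a b v, a ≤ b → v ≤ f a → f b ≤ v → ∃ m, a ≤ m ∧ m ≤ b ∧ f m = v := by
  intro a b v hab hva hbv
  induction b with
  | zero =>
    have ha0 : a = 0 := by omega
    subst ha0
    exact ⟨0, le_refl _, le_refl _, by omega⟩
  | succ b ih =>
    by_cases h : a ≤ b
    · by_cases h2 : f b ≤ v
      · obtain ⟨m, hm1, hm2, hm3⟩ := ih h h2
        exact ⟨m, hm1, by omega, hm3⟩
      · have := hstep b
        exact ⟨b+1, by omega, le_refl _, by omega⟩
    · have hab' : a = b + 1 := by omega
      subst hab'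
      exact ⟨b + 1, le_refl _, le_refl _, by omega⟩

-- a walk that never rises by more than 1 and starts at or below v passes through v
theorem pvIvtUp (f : Nat → Int) (hstep : ∀ k, f (k + 1) ≤ f k + 1) :
    ∀ a b v, a ≤ b → f a ≤ v → v ≤ f b → ∃ m, a ≤ m ∧ m ≤ b ∧ f m = v := by
  intro a b v hab hva hbv
  induction b with
  | zero =>
    have ha0 : a = 0 := by omega
    subst ha0
    exact ⟨0, le_refl _, le_refl _, by omega⟩
  | succ b ih =>
    by_cases h : a ≤ b
    · by_cases h2 : v ≤ f b
      · obtain ⟨m, hm1, hm2, hm3⟩ := ih h h2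
        exact ⟨m, hm1, by omega, hm3⟩
      · have := hstep b
        exact ⟨b+1, by omega, le_refl _, by omega⟩
    · have hab' : a = b + 1 := by omega
      subst hab'
      exact ⟨b + 1, le_refl _, le_refl _, by omega⟩

-- going up from a: if the walk starts above v and never equals v on (a, b], it stays above v
theorem pvStayGt (f : Nat → Int) (hstep : ∀ k, f k - 1 ≤ f (k + 1)) (a b : Nat) (v : Int)
    (ha : v < f a) (hne : ∀ m, a < m → m ≤ b → f m ≠ v) :
    ∀ m, a ≤ m → m ≤ b → v < f m := by
  intro m ham hmb
  induction m with
  | zero =>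
    have ha0 : a = 0 := by omega
    subst ha0
    exact ha
  | succ m ih =>
    rcases Nat.lt_or_ge a (m+1) with h | h
    · have h1 : v < f m := by
        rcases Nat.lt_or_ge a m with h' | h'
        · exact ih (by omega) (by omega)
        · have ham' : a = m := by omega
          subst ham'
          exact ha
      have h2 := hstep m
      have h3 := hne (m+1) (by omega) hmb
      omega
    · have ham' : a = m + 1 := by omega
      subst ham'
      exact ha

-- going down from b: if the walk ends above v and never equals v on [a, b), it stays above v
theorem pvStayGtDown (f : Nat → Int) (hstep : ∀ k, f (k + 1) ≤ f k + 1) (a b : Nat) (v : Int)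
    (hb : v < f b) (hne : ∀ m, a ≤ m → m < b → f m ≠ v) :
    ∀ m, a ≤ m → m ≤ b → v < f m := by
  have key : ∀ d m, a ≤ m → m ≤ b → b - m = d → v < f m := by
    intro d
    induction d with
    | zero =>
      intro m h1 h2 h3
      have hmb : m = b := by omega
      rw [hmb]
      exact hb
    | succ d ih =>
      intro m h1 h2 h3
      have h4 : v < f (m+1) := ih (m+1) (by omega) (by omega) (by omega)
      have h5 := hstep m
      have h6 := hne m h1 (by omega)
      omega
  intro m h1 h2; exact key (b - m) m h1 h2 rfl

-- ---- find? characterizations on index ranges ----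
theorem pvFindRange' {p : Nat → Bool} : ∀ (k s : Nat) {x : Nat},
    ((List.range' s k).find? p = some x ↔ (s ≤ x ∧ x < s + k ∧ p x = true ∧ ∀ m, s ≤ m → m < x → p m = false)) := by
  intro k
  induction k with
  | zero => intro s x; simp [List.range']; omega
  | succ k ih =>
    intro s x
    rw [List.range'_succ, List.find?_cons]
    rcases hps : p s with h | h
    · simp only [cond_false]
      rw [ih]
      constructor
      · rintro ⟨h1, h2, h3, h4⟩
        refine ⟨by omega, by omega, h3, ?_⟩
        intro m hm1 hm2
        rcases Nat.eq_or_lt_of_le hm1 with rfl | h'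
        · exact hps
        · exact h4 m h' hm2
      · rintro ⟨h1, h2, h3, h4⟩
        have hxs : x ≠ s := by intro h'; subst h'; rw [hps] at h3; cases h3
        exact ⟨by omega, by omega, h3, fun m hm1 hm2 => h4 m (by omega) hm2⟩
    · simp only [cond_true]
      constructor
      · rintro ⟨rfl⟩
        exact ⟨le_refl _, by omega, hps, fun m hm1 hm2 => by omega⟩
      · rintro ⟨h1, h2, h3, h4⟩
        rcases Nat.eq_or_lt_of_le h1 with rfl | h'
        · rfl
        · have := h4 s (le_refl _) h'
          rw [hps] at this; cases this

theorem pvFindRangeRev {p : Nat → Bool} : ∀ (n : Nat) {x : Nat},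
    ((List.range n).reverse.find? p = some x ↔ (x < n ∧ p x = true ∧ ∀ m, x < m → m < n → p m = false)) := by
  intro n
  induction n with
  | zero => intro x; simp
  | succ n ih =>
    intro x
    rw [List.range_succ, List.reverse_append]
    simp only [List.reverse_singleton, List.singleton_append, List.find?_cons]
    rcases hpn : p n with h | h
    · simp only [cond_false]
      rw [ih]
      constructor
      · rintro ⟨h1, h2, h3⟩
        refine ⟨by omega, h2, ?_⟩
        intro m hm1 hm2
        rcases Nat.lt_or_ge m n with h' | h'
        · exact h3 m hm1 h'
        · have : m = n := by omega
          subst this; exact hpn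
      · rintro ⟨h1, h2, h3⟩
        have hxn : x ≠ n := by intro h'; subst h'; rw [hpn] at h2; cases h2
        exact ⟨by omega, h2, fun m hm1 hm2 => h3 m hm1 (by omega)⟩
    · simp only [cond_true]
      constructor
      · rintro ⟨rfl⟩
        exact ⟨by omega, hpn, fun m hm1 hm2 => by omega⟩
      · rintro ⟨h1, h2, h3⟩
        rcases Nat.lt_or_ge x n with h' | h'
        · have := h3 n h' (by omega)
          rw [hpn] at this; cases this
        · have : x = n := by omega
          subst this; rfl

-- ---- counter lemmas ----
theorem pvCnt_zero (o c : Char) (t : List Char) : pvCnt o c t 0 = 0 := by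
  simp [pvCnt]

theorem pvCnt_succ (o c : Char) (t : List Char) (k : Nat) :
    pvCnt o c t (k + 1) = pvCnt o c t k
      + (if t[k]? = some o then 1 else 0) - (if t[k]? = some c then 1 else 0) := by
  unfold pvCnt
  rw [List.take_add_one]
  rcases h : t[k]? with _ | ch
  · simp
  · simp only [Option.toList_some, List.count_append, List.count_cons, List.count_nil]
    push_cast
    by_cases h1 : ch = o <;> by_cases h2 : ch = c <;>
      simp [h1, h2] <;> omega

theorem pvCnt_stepDown (o c : Char) (t : List Char) (k : Nat) :
    pvCnt o c t k - 1 ≤ pvCnt o c t (k + 1) := by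
  rw [pvCnt_succ]; split_ifs <;> omega

theorem pvCnt_stepUp (o c : Char) (t : List Char) (k : Nat) :
    pvCnt o c t (k + 1) ≤ pvCnt o c t k + 1 := by
  rw [pvCnt_succ]; split_ifs <;> omega

-- reading the step back: an exact rise names the opener, an exact fall the closer
theorem pvCnt_charUp (o c : Char) (t : List Char) (k : Nat)
    (h : pvCnt o c t (k + 1) = pvCnt o c t k + 1) : t[k]? = some o := by
  rw [pvCnt_succ] at h
  split_ifs at h with h1 h2 <;> first | assumption | omega

theorem pvCnt_charDown (o c : Char) (t : List Char) (k : Nat)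
    (h : pvCnt o c t (k + 1) = pvCnt o c t k - 1) : t[k]? = some c := by
  rw [pvCnt_succ] at h
  split_ifs at h with h1 h2 <;> first | assumption | omega

-- ---- scan-style matching functions (proof-side characterization) ----
-- first position j > i with pvCnt (j+1) = pvCnt i: where A's forward scan stops
def mF (o c : Char) (t : List Char) (i : Nat) : Option Nat :=
  (List.range' (i + 1) (t.length - (i + 1))).find? (fun m => pvCnt o c t (m + 1) == pvCnt o c t i)

-- last position p < j with pvCnt p = pvCnt (j+1): where A's backward scan stops
def mB (o c : Char) (t : List Char) (j : Nat) : Option Nat :=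
  (List.range j).reverse.find? (fun p => pvCnt o c t p == pvCnt o c t (j + 1))

theorem mF_eq_some_iff {o c : Char} {t : List Char} {i j : Nat} :
    mF o c t i = some j ↔
      (i < j ∧ j < t.length ∧ pvCnt o c t (j + 1) = pvCnt o c t i ∧
        ∀ m, i < m → m < j → pvCnt o c t (m + 1) ≠ pvCnt o c t i) := by
  unfold mF
  rw [pvFindRange']
  constructor
  · rintro ⟨h1, h2, h3, h4⟩
    refine ⟨by omega, by omega, by simpa using h3, ?_⟩
    intro m hm1 hm2 hme
    have := h4 m (by omega) (by omega)
    simp [hme] at this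
  · rintro ⟨h1, h2, h3, h4⟩
    refine ⟨by omega, by omega, by simpa using h3, ?_⟩
    intro m hm1 hm2
    simpa using h4 m (by omega) (by omega)

theorem mB_eq_some_iff {o c : Char} {t : List Char} {j p : Nat} :
    mB o c t j = some p ↔
      (p < j ∧ pvCnt o c t p = pvCnt o c t (j + 1) ∧
        ∀ m, p < m → m < j → pvCnt o c t m ≠ pvCnt o c t (j + 1)) := by
  unfold mB
  rw [pvFindRangeRev]
  constructor
  · rintro ⟨h1, h2, h3⟩
    refine ⟨h1, by simpa using h2, ?_⟩
    intro m hm1 hm2 hme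
    have := h3 m hm1 hm2
    simp [hme] at this
  · rintro ⟨h1, h2, h3⟩
    refine ⟨h1, by simpa using h2, ?_⟩
    intro m hm1 hm2
    simpa using h3 m hm1 hm2

theorem pvCnt_up_of_open {o c : Char} {t : List Char} {i : Nat} (hoc : o ≠ c)
    (hio : t[i]? = some o) : pvCnt o c t (i + 1) = pvCnt o c t i + 1 := by
  have h1 : (if t[i]? = some o then (1 : Int) else 0) = 1 := if_pos hio
  have h2 : (if t[i]? = some c then (1 : Int) else 0) = 0 := by
    rw [if_neg]
    rw [hio]
    simp only [Option.some.injEq]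
    exact hoc
  rw [pvCnt_succ, h1, h2]
  omega

theorem pvCnt_down_of_close {o c : Char} {t : List Char} {j : Nat} (hoc : o ≠ c)
    (hjc : t[j]? = some c) : pvCnt o c t (j + 1) = pvCnt o c t j - 1 := by
  have h1 : (if t[j]? = some c then (1 : Int) else 0) = 1 := if_pos hjc
  have h2 : (if t[j]? = some o then (1 : Int) else 0) = 0 := by
    rw [if_neg]
    rw [hjc]
    simp only [Option.some.injEq]
    exact fun h => hoc h.symm
  rw [pvCnt_succ, h1, h2]
  omega

-- on (i, j] the counter stays strictly above its start value
theorem mF_gt {o c : Char} {t : List Char} {i j : Nat} (hoc : o ≠ c)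
    (hio : t[i]? = some o) (h : mF o c t i = some j) :
    ∀ m, i < m → m ≤ j → pvCnt o c t i < pvCnt o c t m := by
  obtain ⟨h1, h2, h3, h4⟩ := mF_eq_some_iff.mp h
  have hup := pvCnt_up_of_open hoc hio
  have ha : pvCnt o c t i < pvCnt o c t (i + 1) := by omega
  have key := pvStayGt (pvCnt o c t) (pvCnt_stepDown o c t) (i + 1) j (pvCnt o c t i) ha
    (fun m hm1 hm2 => by
      have h5 := h4 (m - 1) (by omega) (by omega)
      have hm : m - 1 + 1 = m := by omega
      rw [hm] at h5
      exact h5)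
  intro m hm1 hm2
  exact key m (by omega) hm2

theorem mF_close {o c : Char} {t : List Char} {i j : Nat} (hoc : o ≠ c)
    (hio : t[i]? = some o) (h : mF o c t i = some j) : t[j]? = some c := by
  obtain ⟨h1, h2, h3, h4⟩ := mF_eq_some_iff.mp h
  have hgt := mF_gt hoc hio h j h1 (le_refl _)
  have hd := pvCnt_stepDown o c t j
  have hu := pvCnt_stepUp o c t j
  exact pvCnt_charDown o c t j (by omega)

theorem mF_exists {o c : Char} {t : List Char} {i : Nat} (hoc : o ≠ c)
    (hio : t[i]? = some o)
    (hbal0 : 0 ≤ pvCnt o c t i) (hbalEnd : pvCnt o c t t.length = 0) :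
    ∃ j, mF o c t i = some j := by
  have hil : i < t.length := by
    by_contra h
    rw [List.getElem?_eq_none (by omega)] at hio
    cases hio
  have hup := pvCnt_up_of_open hoc hio
  obtain ⟨m, hm1, hm2, hm3⟩ := pvIvtDown (pvCnt o c t) (pvCnt_stepDown o c t)
    (i + 1) t.length (pvCnt o c t i) (by omega) (by omega) (by omega)
  have hmi : i + 1 < m := by
    rcases Nat.eq_or_lt_of_le hm1 with rfl | h'
    · omega
    · exact h'
  have : ∃ x ∈ List.range' (i + 1) (t.length - (i + 1)),
      (fun m => pvCnt o c t (m + 1) == pvCnt o c t i) x = true := by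
    refine ⟨m - 1, List.mem_range'_1.mpr ⟨by omega, by omega⟩, ?_⟩
    have hm : m - 1 + 1 = m := by omega
    simp only [hm, hm3, beq_self_eq_true]
  obtain ⟨j, hj⟩ := Option.isSome_iff_exists.mp (List.find?_isSome.mpr this)
  exact ⟨j, hj⟩

theorem mB_gt {o c : Char} {t : List Char} {j p : Nat} (hoc : o ≠ c)
    (hjc : t[j]? = some c) (h : mB o c t j = some p) :
    ∀ m, p < m → m ≤ j → pvCnt o c t p < pvCnt o c t m := by
  obtain ⟨h1, h2, h3⟩ := mB_eq_some_iff.mp h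
  have hdn := pvCnt_down_of_close hoc hjc
  have hb : pvCnt o c t p < pvCnt o c t j := by omega
  have key := pvStayGtDown (pvCnt o c t) (pvCnt_stepUp o c t) (p + 1) j (pvCnt o c t p) hb
    (fun m hm1 hm2 => by rw [h2]; exact h3 m (by omega) hm2)
  intro m hm1 hm2
  exact key m (by omega) hm2

theorem mB_open {o c : Char} {t : List Char} {j p : Nat} (hoc : o ≠ c)
    (hjc : t[j]? = some c) (h : mB o c t j = some p) : t[p]? = some o := by
  obtain ⟨h1, h2, h3⟩ := mB_eq_some_iff.mp h
  have hgt := mB_gt hoc hjc h (p + 1) (by omega) (by omega)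
  have hd := pvCnt_stepDown o c t p
  have hu := pvCnt_stepUp o c t p
  exact pvCnt_charUp o c t p (by omega)

theorem mB_exists {o c : Char} {t : List Char} {j : Nat} (hoc : o ≠ c)
    (hjc : t[j]? = some c) (hbal : 0 ≤ pvCnt o c t (j + 1)) :
    ∃ p, mB o c t j = some p := by
  have hdn := pvCnt_down_of_close hoc hjc
  obtain ⟨m, hm1, hm2, hm3⟩ := pvIvtUp (pvCnt o c t) (pvCnt_stepUp o c t)
    0 j (pvCnt o c t (j + 1)) (by omega) (by rw [pvCnt_zero]; omega) (by omega)
  have hmj : m < j := by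
    rcases Nat.eq_or_lt_of_le hm2 with rfl | h'
    · omega
    · exact h'
  have : ∃ x ∈ (List.range j).reverse,
      (fun p => pvCnt o c t p == pvCnt o c t (j + 1)) x = true := by
    refine ⟨m, ?_, by simp only [hm3, beq_self_eq_true]⟩
    rw [List.mem_reverse, List.mem_range]
    exact hmj
  obtain ⟨p, hp⟩ := Option.isSome_iff_exists.mp (List.find?_isSome.mpr this)
  exact ⟨p, hp⟩

theorem mF_of_mB {o c : Char} {t : List Char} {j p : Nat} (hoc : o ≠ c)
    (hjc : t[j]? = some c) (hjl : j < t.length) (h : mB o c t j = some p) :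
    mF o c t p = some j := by
  obtain ⟨h1, h2, h3⟩ := mB_eq_some_iff.mp h
  have hdn := pvCnt_down_of_close hoc hjc
  rw [mF_eq_some_iff]
  refine ⟨h1, hjl, by omega, ?_⟩
  intro m hm1 hm2
  rcases Nat.lt_or_ge (m + 1) j with h' | h'
  · have := h3 (m + 1) (by omega) h'
    omega
  · have : m + 1 = j := by omega
    rw [this]
    omega

theorem mB_of_mF {o c : Char} {t : List Char} {i j : Nat} (hoc : o ≠ c)
    (hio : t[i]? = some o) (h : mF o c t i = some j) :
    mB o c t j = some i := by
  obtain ⟨h1, h2, h3, h4⟩ := mF_eq_some_iff.mp h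
  have hgt := mF_gt hoc hio h
  rw [mB_eq_some_iff]
  refine ⟨h1, by omega, ?_⟩
  intro m hm1 hm2
  have := hgt m hm1 (by omega)
  omega

-- mF / mB only look at the counter and the length
theorem pvFind?_congr {α : Type} {p q : α → Bool} :
    ∀ (l : List α), (∀ x ∈ l, p x = q x) → l.find? p = l.find? q := by
  intro l
  induction l with
  | nil => intro _; rfl
  | cons a l ih =>
    intro h
    rw [List.find?_cons, List.find?_cons, h a (List.mem_cons_self)]
    cases hqa : q a
    · simp only [cond_false]
      exact ih fun x hx => h x (List.mem_cons_of_mem _ hx)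
    · simp only [cond_true]

theorem mF_congr {o c : Char} {t t' : List Char} (hlen : t'.length = t.length)
    (hcnt : ∀ k, pvCnt o c t' k = pvCnt o c t k) (i : Nat) :
    mF o c t' i = mF o c t i := by
  unfold mF
  rw [hlen]
  exact pvFind?_congr _ (fun m _ => by rw [hcnt, hcnt])

theorem mB_congr {o c : Char} {t t' : List Char} (hlen : t'.length = t.length)
    (hcnt : ∀ k, pvCnt o c t' k = pvCnt o c t k) (j : Nat) :
    mB o c t' j = mB o c t j := by
  unfold mB
  exact pvFind?_congr _ (fun m _ => by rw [hcnt, hcnt])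

-- ---- dotting a matched pair ----
def dot2 (t : List Char) (p q : Nat) : List Char := (t.set p '.').set q '.'

theorem dot2_length (t : List Char) (p q : Nat) : (dot2 t p q).length = t.length := by
  simp [dot2]

theorem pvCnt_set (a b : Char) (t : List Char) (p : Nat) (hp : p < t.length) (v : Char) :
    ∀ k, pvCnt a b (t.set p v) k = pvCnt a b t k +
      (if p < k then (if v = a then 1 else 0) - (if v = b then 1 else 0)
        - (if t[p]? = some a then 1 else 0) + (if t[p]? = some b then 1 else 0) else 0) := by
  intro k
  induction k with
  | zero => rw [pvCnt_zero, pvCnt_zero]; simp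
  | succ k ih =>
    rw [pvCnt_succ, pvCnt_succ, ih]
    by_cases hk : p = k
    · subst hk
      rw [List.getElem?_set_eq_of_lt v hp]
      rw [List.getElem?_eq_getElem hp]
      simp only [Option.some.injEq]
      have h1 : ¬ (p < p) := by omega
      have h2 : p < p + 1 := by omega
      rw [if_neg h1, if_pos h2]
      by_cases hva : v = a <;> by_cases hvb : v = b <;>
        by_cases hta : t[p] = a <;> by_cases htb : t[p] = b <;>
        simp [hva, hvb, hta, htb] <;> omega
    · rw [List.getElem?_set_ne hk]
      by_cases h1 : p < k
      · have h2 : p < k + 1 := by omega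
        rw [if_pos h1, if_pos h2]
        omega
      · have h2 : ¬ (p < k + 1) := by omega
        rw [if_neg h1, if_neg h2]
        omega

theorem pvCnt_dot2_same {o c : Char} {t : List Char} {p q : Nat} (hoc : o ≠ c)
    (hdo : o ≠ '.') (hdc : c ≠ '.')
    (hpo : t[p]? = some o) (hqc : t[q]? = some c) (hpq : p ≠ q) :
    ∀ k, pvCnt o c (dot2 t p q) k =
      pvCnt o c t k - (if p < k then 1 else 0) + (if q < k then 1 else 0) := by
  have hp : p < t.length := by
    by_contra h; rw [List.getElem?_eq_none (by omega)] at hpo; cases hpo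
  have hq : q < t.length := by
    by_contra h; rw [List.getElem?_eq_none (by omega)] at hqc; cases hqc
  intro k
  unfold dot2
  rw [pvCnt_set o c (t.set p '.') q (by simpa using hq) '.' k,
      pvCnt_set o c t p hp '.' k]
  have hq' : (t.set p '.')[q]? = some c := by
    rw [List.getElem?_set_ne hpq]; exact hqc
  rw [hpo, hq']
  have h1 : ¬ ('.' = o) := fun h => hdo h.symm
  have h2 : ¬ ('.' = c) := fun h => hdc h.symm
  have h3 : ¬ (c = o) := fun h => hoc h.symm
  simp only [Option.some.injEq, if_neg h1, if_neg h2, if_neg h3, if_neg hoc, if_pos rfl]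
  split_ifs <;> omega

theorem pvCnt_dot2_other {o2 c2 : Char} {t : List Char} {p q : Nat}
    (ho2 : t[p]? ≠ some o2) (hc2 : t[p]? ≠ some c2)
    (ho2' : t[q]? ≠ some o2) (hc2' : t[q]? ≠ some c2)
    (hdo : o2 ≠ '.') (hdc : c2 ≠ '.')
    (hp : p < t.length) (hq : q < t.length) (hpq : p ≠ q) :
    ∀ k, pvCnt o2 c2 (dot2 t p q) k = pvCnt o2 c2 t k := by
  intro k
  unfold dot2
  rw [pvCnt_set o2 c2 (t.set p '.') q (by simpa using hq) '.' k,
      pvCnt_set o2 c2 t p hp '.' k]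
  have hq' : (t.set p '.')[q]? = t[q]? := List.getElem?_set_ne hpq
  have h1 : ¬ ('.' = o2) := fun h => hdo h.symm
  have h2 : ¬ ('.' = c2) := fun h => hdc h.symm
  rw [hq']
  simp only [if_neg h1, if_neg h2, if_neg ho2, if_neg hc2, if_neg ho2', if_neg hc2']
  split_ifs <;> omega

-- ---- preservation: dotting a matched pair does not move any other match ----
theorem mF_dot2 {o c : Char} {t : List Char} {p q i j : Nat} (hoc : o ≠ c)
    (hdo : o ≠ '.') (hdc : c ≠ '.')
    (hpo : t[p]? = some o) (hpq : mF o c t p = some q)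
    (hip : i ≠ p) (hiq : i ≠ q) (hio : t[i]? = some o)
    (hij : mF o c t i = some j) :
    mF o c (dot2 t p q) i = some j := by
  have hqc : t[q]? = some c := mF_close hoc hpo hpq
  obtain ⟨hpq1, hq2, hPcnt, _⟩ := mF_eq_some_iff.mp hpq
  have hP := mF_gt hoc hpo hpq
  obtain ⟨hij1, hj2, hIcnt, hImin⟩ := mF_eq_some_iff.mp hij
  have hG := mF_gt hoc hio hij
  have hlen : (dot2 t p q).length = t.length := dot2_length t p q
  have hcnt := pvCnt_dot2_same hoc hdo hdc hpo hqc (by omega)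
  have hjq : j ≠ q := by
    intro h
    subst h
    rcases Nat.lt_or_ge i p with h' | h'
    · have h1 := hG p h' (by omega)
      omega
    · have hip' : p < i := by omega
      have h1 := hP i hip' (by omega)
      omega
  rw [mF_eq_some_iff, hlen]
  rcases Nat.lt_or_ge q i with hc1 | h
  · -- the dotted pair lies entirely below i
    refine ⟨hij1, hj2, ?_, ?_⟩
    · rw [hcnt, hcnt]
      split_ifs <;> omega
    · intro m hm1 hm2
      have h5 := hImin m hm1 hm2
      rw [hcnt, hcnt]
      split_ifs <;> omega
  rcases Nat.lt_or_ge p i with hc2 | h'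
  · -- p < i < q (i strictly inside the dotted pair): then j < q as well
    have hiq2 : i < q := by omega
    have hgtp : pvCnt o c t p < pvCnt o c t i := hP i (by omega) (by omega)
    have hjq2 : j < q := by
      rcases Nat.lt_or_ge j q with h1 | h1
      · exact h1
      · exfalso
        rcases Nat.eq_or_lt_of_le h1 with h2 | h2
        · omega
        · have h3 := hG (q + 1) (by omega) (by omega)
          omega
    refine ⟨hij1, hj2, ?_, ?_⟩
    · rw [hcnt, hcnt]
      split_ifs <;> omega
    · intro m hm1 hm2
      have h5 := hImin m hm1 hm2
      rw [hcnt, hcnt]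
      split_ifs <;> omega
  · -- i < p
    have hip2 : i < p := by omega
    have htri : j < p ∨ q < j := by
      rcases Nat.lt_or_ge j p with h1 | h1
      · exact Or.inl h1
      · right
        rcases Nat.eq_or_lt_of_le h1 with h2 | h2
        · exfalso
          have hjc : t[j]? = some c := mF_close hoc hio hij
          rw [← h2] at hjc
          rw [hpo] at hjc
          have : o = c := by
            have := hjc
            simpa using this
          exact hoc this
        · rcases Nat.lt_or_ge j q with h3 | h3
          · exfalso
            have h4 := hG p (by omega) (by omega)
            have h5 := hP (j + 1) (by omega) (by omega)
            omega
          · rcases Nat.eq_or_lt_of_le h3 with h4 | h4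
            · exfalso
              have h5 := hG p (by omega) (by omega)
              omega
            · exact h4
    rcases htri with hj3 | hj3
    · -- i < j < p: untouched prefix
      refine ⟨hij1, hj2, ?_, ?_⟩
      · rw [hcnt, hcnt]
        split_ifs <;> omega
      · intro m hm1 hm2
        have h5 := hImin m hm1 hm2
        rw [hcnt, hcnt]
        split_ifs <;> omega
    · -- i < p < q < j: the dotted pair sits inside (i, j)
      have hpgt : pvCnt o c t i < pvCnt o c t p := hG p (by omega) (by omega)
      refine ⟨hij1, hj2, ?_, ?_⟩
      · rw [hcnt, hcnt]
        split_ifs <;> omega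
      · intro m hm1 hm2
        have h5 := hImin m hm1 hm2
        rw [hcnt, hcnt]
        rcases Nat.lt_or_ge p (m + 1) with hz1 | hz1
        · rcases Nat.lt_or_ge q (m + 1) with hz2 | hz2
          · split_ifs <;> omega
          · have h6 := hP (m + 1) hz1 (by omega)
            split_ifs <;> omega
        · split_ifs <;> omega

theorem mB_dot2 {o c : Char} {t : List Char} {p q i r : Nat} (hoc : o ≠ c)
    (hdo : o ≠ '.') (hdc : c ≠ '.')
    (hpo : t[p]? = some o) (hpq : mF o c t p = some q)
    (hip : i ≠ p) (hiq : i ≠ q) (hic : t[i]? = some c)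
    (hir : mB o c t i = some r) :
    mB o c (dot2 t p q) i = some r := by
  have hqc : t[q]? = some c := mF_close hoc hpo hpq
  obtain ⟨hpq1, hq2, hPcnt, _⟩ := mF_eq_some_iff.mp hpq
  have hP := mF_gt hoc hpo hpq
  obtain ⟨hri, hRcnt, hRmin⟩ := mB_eq_some_iff.mp hir
  have hG := mB_gt hoc hic hir
  have hro : t[r]? = some o := mB_open hoc hic hir
  have hil : i < t.length := by
    by_contra h; rw [List.getElem?_eq_none (by omega)] at hic; cases hic
  have hcnt := pvCnt_dot2_same hoc hdo hdc hpo hqc (by omega)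
  rw [mB_eq_some_iff]
  rcases Nat.lt_or_ge i p with hc1 | h
  · -- i and r below p: untouched prefix
    refine ⟨hri, ?_, ?_⟩
    · rw [hcnt, hcnt]
      split_ifs <;> omega
    · intro m hm1 hm2
      have h5 := hRmin m hm1 hm2
      rw [hcnt, hcnt]
      split_ifs <;> omega
  rcases Nat.lt_or_ge i q with hc2 | h'
  · -- p < i < q: then p < r too
    have hpi : p < i := by omega
    have hgtp : pvCnt o c t p < pvCnt o c t (i + 1) := hP (i + 1) (by omega) (by omega)
    have hrp : p < r := by
      rcases Nat.lt_or_ge p r with h1 | h1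
      · exact h1
      · exfalso
        rcases Nat.eq_or_lt_of_le h1 with h2 | h2
        · subst h2
          omega
        · have h3 := hG p (by omega) (by omega)
          omega
    refine ⟨hri, ?_, ?_⟩
    · rw [hcnt, hcnt]
      split_ifs <;> omega
    · intro m hm1 hm2
      have h5 := hRmin m hm1 hm2
      rw [hcnt, hcnt]
      split_ifs <;> omega
  · -- q < i
    have hqi : q < i := by omega
    have htri : r < p ∨ q < r := by
      rcases Nat.lt_or_ge r p with h1 | h1
      · exact Or.inl h1
      · right
        rcases Nat.eq_or_lt_of_le h1 with h2 | h2
        · exfalso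
          subst h2
          have h3 := hG (q + 1) (by omega) (by omega)
          omega
        · rcases Nat.lt_or_ge r q with h3 | h3
          · exfalso
            have h4 := hP r (by omega) (by omega)
            have h5 := hG (q + 1) (by omega) (by omega)
            omega
          · rcases Nat.eq_or_lt_of_le h3 with h4 | h4
            · exfalso
              rw [h4] at hqc
              rw [hro] at hqc
              have : o = c := by simpa using hqc
              exact hoc this
            · exact h4
    rcases htri with hr3 | hr3
    · -- r < p < q < i
      have hpgt : pvCnt o c t r < pvCnt o c t p := hG p (by omega) (by omega)
      refine ⟨hri, ?_, ?_⟩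
      · rw [hcnt, hcnt]
        split_ifs <;> omega
      · intro m hm1 hm2
        have h5 := hRmin m hm1 hm2
        rw [hcnt, hcnt]
        rcases Nat.lt_or_ge p m with hz1 | hz1
        · rcases Nat.lt_or_ge q m with hz2 | hz2
          · split_ifs <;> omega
          · have h6 := hP m hz1 (by omega)
            split_ifs <;> omega
        · split_ifs <;> omega
    · -- q < r < i
      refine ⟨hri, ?_, ?_⟩
      · rw [hcnt, hcnt]
        split_ifs <;> omega
      · intro m hm1 hm2
        have h5 := hRmin m hm1 hm2
        rw [hcnt, hcnt]
        split_ifs <;> omega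

-- ---- balance ----
def pvBalP (o c : Char) (t : List Char) : Prop :=
  (∀ k, k ≤ t.length → 0 ≤ pvCnt o c t k) ∧ pvCnt o c t t.length = 0

theorem pvBalancedB_iff {o c : Char} {t : List Char} :
    pvBalancedB o c t = true ↔ pvBalP o c t := by
  unfold pvBalancedB pvBalP
  rw [Bool.and_eq_true, List.all_eq_true]
  constructor
  · rintro ⟨h1, h2⟩
    refine ⟨?_, by simpa using h2⟩
    intro k hk
    have := h1 k (List.mem_range.mpr (by omega))
    simpa using this
  · rintro ⟨h1, h2⟩
    refine ⟨?_, by simpa using h2⟩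
    intro k hk
    have := h1 k (by have := List.mem_range.mp hk; omega)
    simpa using this

-- ---- ground facts about the eight bracket types (all by decide) ----
theorem pvPairs_ne : ∀ pr ∈ pvPairs, pr.1 ≠ pr.2 ∧ pr.1 ≠ '.' ∧ pr.2 ≠ '.' := by decide

theorem pvPairs_distinct : ∀ pr ∈ pvPairs, ∀ pr' ∈ pvPairs,
    pr = pr' ∨ (pr.1 ≠ pr'.1 ∧ pr.1 ≠ pr'.2 ∧ pr.2 ≠ pr'.1 ∧ pr.2 ≠ pr'.2) := by decide

theorem fmcOpenList_eq_map : fmcOpenList = pvPairs.map Prod.fst := by decide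
theorem fmcCloseList_eq_map : fmcCloseList = pvPairs.map Prod.snd := by decide
theorem pvOpen_mem_iff {ch : Char} : ch ∈ fmcOpenList ↔ ∃ pr ∈ pvPairs, ch = pr.1 := by
  rw [fmcOpenList_eq_map]
  simp [List.mem_map, eq_comm]

theorem pvClose_mem_iff {ch : Char} : ch ∈ fmcCloseList ↔ ∃ pr ∈ pvPairs, ch = pr.2 := by
  rw [fmcCloseList_eq_map]
  simp [List.mem_map, eq_comm]

-- ---- the reachable texts: the original with some matched relevant pairs dotted out ----
inductive pvReach (t0 : List Char) (cs : List (Int × Int)) : List Char → Prop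
  | refl : pvReach t0 cs t0
  | step {t : List Char} {p q : Nat} {pr : Char × Char} :
      pvReach t0 cs t → pr ∈ pvPairs → pvRelevantB cs t0 pr = true →
      t[p]? = some pr.1 → mF pr.1 pr.2 t p = some q →
      pvReach t0 cs (dot2 t p q)

theorem pvReach_length {t0 cs t} (h : pvReach t0 cs t) : t.length = t0.length := by
  induction h with
  | refl => rfl
  | step _ _ _ _ _ ih => rw [dot2_length]; exact ih

theorem pvReach_char {t0 cs t} (h : pvReach t0 cs t) :
    ∀ (i : Nat) (x : Char), t[i]? = some x → x ≠ '.' → t0[i]? = some x := by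
  induction h with
  | refl => exact fun i x hx _ => hx
  | @step t p q pr hre hpr hrel hpo hq ih =>
    intro i x hx hdot
    refine ih i x ?_ hdot
    by_cases hiq : i = q
    · subst hiq
      obtain ⟨_, hq2, _, _⟩ := mF_eq_some_iff.mp hq
      rw [dot2, List.getElem?_set_eq_of_lt '.' (by simpa using hq2)] at hx
      have hxd : x = '.' := by simpa using hx.symm
      exact absurd hxd hdot
    · by_cases hip : i = p
      · subst hip
        have hpl : i < t.length := by
          by_contra hcon
          rw [List.getElem?_eq_none (by omega)] at hpo
          cases hpo
        rw [dot2, List.getElem?_set_ne (Ne.symm hiq), List.getElem?_set_eq_of_lt '.' hpl] at hx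
        have hxd : x = '.' := by simpa using hx.symm
        exact absurd hxd hdot
      · rw [dot2, List.getElem?_set_ne (Ne.symm hiq), List.getElem?_set_ne (fun hh => hip hh.symm)] at hx
        exact hx

theorem pvReach_mF {t0 cs t} (h : pvReach t0 cs t)
    (H : ∀ pr ∈ pvPairs, pvRelevantB cs t0 pr = true → pvBalP pr.1 pr.2 t0) :
    ∀ pr ∈ pvPairs, pvRelevantB cs t0 pr = true → ∀ i : Nat, t[i]? = some pr.1 →
      ∃ j, mF pr.1 pr.2 t i = some j ∧ mF pr.1 pr.2 t0 i = some j := by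
  induction h with
  | refl =>
    intro pr hpr hrel i hio
    obtain ⟨hoc, _, _⟩ := pvPairs_ne pr hpr
    obtain ⟨hb1, hb2⟩ := H pr hpr hrel
    have hil : i < t0.length := by
      by_contra hcon
      rw [List.getElem?_eq_none (by omega)] at hio
      cases hio
    obtain ⟨j, hj⟩ := mF_exists hoc hio (hb1 i (by omega)) hb2
    exact ⟨j, hj, hj⟩
  | @step t p q pr0 hre hpr0 hrel0 hpo hq ih =>
    intro pr hpr hrel i hio
    obtain ⟨hoc0, hdo0, hdc0⟩ := pvPairs_ne pr0 hpr0
    obtain ⟨hoc, hdo, hdc⟩ := pvPairs_ne pr hpr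
    have hqc : t[q]? = some pr0.2 := mF_close hoc0 hpo hq
    obtain ⟨hpq1, hq2, _, _⟩ := mF_eq_some_iff.mp hq
    have hpl : p < t.length := by
      by_contra hcon
      rw [List.getElem?_eq_none (by omega)] at hpo
      cases hpo
    have hiq : i ≠ q := by
      intro hh; subst hh
      rw [dot2, List.getElem?_set_eq_of_lt '.' (by simpa using hq2)] at hio
      exact hdo (by simpa using hio.symm)
    have hip : i ≠ p := by
      intro hh; subst hh
      rw [dot2, List.getElem?_set_ne (Ne.symm hiq), List.getElem?_set_eq_of_lt '.' hpl] at hio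
      exact hdo (by simpa using hio.symm)
    have hio' : t[i]? = some pr.1 := by
      rw [dot2, List.getElem?_set_ne (Ne.symm hiq), List.getElem?_set_ne (fun hh => hip hh.symm)] at hio
      exact hio
    obtain ⟨j, hjt, hj0⟩ := ih pr hpr hrel i hio'
    rcases pvPairs_distinct pr hpr pr0 hpr0 with heq | hne
    · subst heq
      exact ⟨j, mF_dot2 hoc hdo hdc hpo hq hip hiq hio' hjt, hj0⟩
    · refine ⟨j, ?_, hj0⟩
      rw [mF_congr (dot2_length t p q)
        (pvCnt_dot2_other
          (by rw [hpo]; simp; exact fun hh => hne.1 hh.symm)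
          (by rw [hpo]; simp; exact fun hh => hne.2.2.1 hh.symm)
          (by rw [hqc]; simp; exact fun hh => hne.2.1 hh.symm)
          (by rw [hqc]; simp; exact fun hh => hne.2.2.2 hh.symm)
          hdo hdc hpl (by omega) (by omega)) i]
      exact hjt

theorem pvReach_mB {t0 cs t} (h : pvReach t0 cs t)
    (H : ∀ pr ∈ pvPairs, pvRelevantB cs t0 pr = true → pvBalP pr.1 pr.2 t0) :
    ∀ pr ∈ pvPairs, pvRelevantB cs t0 pr = true → ∀ i : Nat, t[i]? = some pr.2 →
      ∃ r, mB pr.1 pr.2 t i = some r ∧ mB pr.1 pr.2 t0 i = some r := by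
  induction h with
  | refl =>
    intro pr hpr hrel i hic
    obtain ⟨hoc, _, _⟩ := pvPairs_ne pr hpr
    obtain ⟨hb1, hb2⟩ := H pr hpr hrel
    have hil : i < t0.length := by
      by_contra hcon
      rw [List.getElem?_eq_none (by omega)] at hic
      cases hic
    obtain ⟨r, hr⟩ := mB_exists hoc hic (hb1 (i + 1) (by omega))
    exact ⟨r, hr, hr⟩
  | @step t p q pr0 hre hpr0 hrel0 hpo hq ih =>
    intro pr hpr hrel i hic
    obtain ⟨hoc0, hdo0, hdc0⟩ := pvPairs_ne pr0 hpr0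
    obtain ⟨hoc, hdo, hdc⟩ := pvPairs_ne pr hpr
    have hqc : t[q]? = some pr0.2 := mF_close hoc0 hpo hq
    obtain ⟨hpq1, hq2, _, _⟩ := mF_eq_some_iff.mp hq
    have hpl : p < t.length := by
      by_contra hcon
      rw [List.getElem?_eq_none (by omega)] at hpo
      cases hpo
    have hiq : i ≠ q := by
      intro hh; subst hh
      rw [dot2, List.getElem?_set_eq_of_lt '.' (by simpa using hq2)] at hic
      exact hdc (by simpa using hic.symm)
    have hip : i ≠ p := by
      intro hh; subst hh
      rw [dot2, List.getElem?_set_ne (Ne.symm hiq), List.getElem?_set_eq_of_lt '.' hpl] at hic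
      exact hdc (by simpa using hic.symm)
    have hic' : t[i]? = some pr.2 := by
      rw [dot2, List.getElem?_set_ne (Ne.symm hiq), List.getElem?_set_ne (fun hh => hip hh.symm)] at hic
      exact hic
    obtain ⟨r, hrt, hr0⟩ := ih pr hpr hrel i hic'
    rcases pvPairs_distinct pr hpr pr0 hpr0 with heq | hne
    · subst heq
      exact ⟨r, mB_dot2 hoc hdo hdc hpo hq hip hiq hic' hrt, hr0⟩
    · refine ⟨r, ?_, hr0⟩
      rw [mB_congr (dot2_length t p q)
        (pvCnt_dot2_other
          (by rw [hpo]; simp; exact fun hh => hne.1 hh.symm)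
          (by rw [hpo]; simp; exact fun hh => hne.2.2.1 hh.symm)
          (by rw [hqc]; simp; exact fun hh => hne.2.1 hh.symm)
          (by rw [hqc]; simp; exact fun hh => hne.2.2.2 hh.symm)
          hdo hdc hpl (by omega) (by omega)) i]
      exact hrt

-- ---- the stack pass of B: characterization of the stacks and the mate table ----
def stkPred (o c : Char) (t : List Char) (k : Nat) (p : Nat) : Bool :=
  (t[p]? == some o) && ((List.range (k + 1)).all (fun m => decide (p < m → pvCnt o c t p < pvCnt o c t m)))

def stkSpec (o c : Char) (t : List Char) (k : Nat) : List Int :=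
  ((List.range k).filter (stkPred o c t k)).map (fun p => ((p : Nat) : Int))

theorem stkPred_iff {o c : Char} {t : List Char} {k p : Nat} :
    stkPred o c t k p = true ↔
      (t[p]? = some o ∧ ∀ m, p < m → m ≤ k → pvCnt o c t p < pvCnt o c t m) := by
  unfold stkPred
  rw [Bool.and_eq_true, beq_iff_eq, List.all_eq_true]
  constructor
  · rintro ⟨h1, h2⟩
    refine ⟨h1, fun m hm1 hm2 => ?_⟩
    have := h2 m (List.mem_range.mpr (by omega))
    exact (decide_eq_true_iff.mp this) hm1
  · rintro ⟨h1, h2⟩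
    refine ⟨h1, fun m hm => ?_⟩
    exact decide_eq_true_iff.mpr (fun hm1 => h2 m hm1 (by have := List.mem_range.mp hm; omega))

theorem stkSpec_push {o c : Char} {t : List Char} {k : Nat} (hoc : o ≠ c)
    (hko : t[k]? = some o) :
    stkSpec o c t (k + 1) = stkSpec o c t k ++ [((k : Nat) : Int)] := by
  have hup : pvCnt o c t (k + 1) = pvCnt o c t k + 1 := pvCnt_up_of_open hoc hko
  unfold stkSpec
  rw [List.range_succ, List.filter_append]
  have hfk : List.filter (stkPred o c t (k + 1)) [k] = [k] := by
    rw [List.filter_cons]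
    rw [if_pos]
    · rfl
    · exact stkPred_iff.mpr ⟨hko, fun m hm1 hm2 => by
        have : m = k + 1 := by omega
        subst this
        omega⟩
  have hcg : List.filter (stkPred o c t (k + 1)) (List.range k) =
      List.filter (stkPred o c t k) (List.range k) := by
    apply List.filter_congr
    intro p hp
    have hpk : p < k := List.mem_range.mp hp
    rw [Bool.eq_iff_iff, stkPred_iff, stkPred_iff]
    constructor
    · rintro ⟨h1, h2⟩
      exact ⟨h1, fun m hm1 hm2 => h2 m hm1 (by omega)⟩
    · rintro ⟨h1, h2⟩
      refine ⟨h1, fun m hm1 hm2 => ?_⟩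
      rcases Nat.eq_or_lt_of_le hm2 with hm3 | hm3
      · subst hm3
        have := h2 k (by omega) (le_refl _)
        omega
      · exact h2 m hm1 (by omega)
  rw [hfk, hcg, List.map_append]
  rfl

theorem stkSpec_neutral {o c : Char} {t : List Char} {k : Nat}
    (hcnt : pvCnt o c t (k + 1) = pvCnt o c t k) (hko : t[k]? ≠ some o) :
    stkSpec o c t (k + 1) = stkSpec o c t k := by
  unfold stkSpec
  rw [List.range_succ, List.filter_append]
  have hfk : List.filter (stkPred o c t (k + 1)) [k] = [] := by
    rw [List.filter_cons]
    rw [if_neg]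
    · rfl
    · intro hcon
      exact hko (stkPred_iff.mp hcon).1
  have hcg : List.filter (stkPred o c t (k + 1)) (List.range k) =
      List.filter (stkPred o c t k) (List.range k) := by
    apply List.filter_congr
    intro p hp
    have hpk : p < k := List.mem_range.mp hp
    rw [Bool.eq_iff_iff, stkPred_iff, stkPred_iff]
    constructor
    · rintro ⟨h1, h2⟩
      exact ⟨h1, fun m hm1 hm2 => h2 m hm1 (by omega)⟩
    · rintro ⟨h1, h2⟩
      refine ⟨h1, fun m hm1 hm2 => ?_⟩
      rcases Nat.eq_or_lt_of_le hm2 with hm3 | hm3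
      · subst hm3
        have := h2 k (by omega) (le_refl _)
        omega
      · exact h2 m hm1 (by omega)
  rw [hfk, hcg, List.append_nil]

theorem mB_mem_stkSpec {o c : Char} {t : List Char} {k r : Nat} (hoc : o ≠ c)
    (hkc : t[k]? = some c) (hmb : mB o c t k = some r) :
    ((r : Nat) : Int) ∈ stkSpec o c t k := by
  obtain ⟨hrk, hRcnt, hRmin⟩ := mB_eq_some_iff.mp hmb
  unfold stkSpec
  apply List.mem_map_of_mem
  rw [List.mem_filter]
  refine ⟨List.mem_range.mpr hrk, stkPred_iff.mpr ⟨mB_open hoc hkc hmb, ?_⟩⟩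
  exact fun m hm1 hm2 => mB_gt hoc hkc hmb m hm1 hm2

theorem stkSpec_nonempty_mB {o c : Char} {t : List Char} {k : Nat} (hoc : o ≠ c)
    (hkc : t[k]? = some c) (hne : stkSpec o c t k ≠ []) :
    ∃ r, mB o c t k = some r := by
  have hdn : pvCnt o c t (k + 1) = pvCnt o c t k - 1 := pvCnt_down_of_close hoc hkc
  obtain ⟨p, hp⟩ : ∃ p, p ∈ List.filter (stkPred o c t k) (List.range k) := by
    by_contra hcon
    push_neg at hcon
    apply hne
    unfold stkSpec
    rw [List.eq_nil_iff_forall_not_mem.mpr hcon]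
    rfl
  rw [List.mem_filter] at hp
  obtain ⟨hpk, hpred⟩ := hp
  have hpk' : p < k := List.mem_range.mp hpk
  obtain ⟨hpo, hcond⟩ := stkPred_iff.mp hpred
  obtain ⟨m, hm1, hm2, hm3⟩ := pvIvtUp (pvCnt o c t) (pvCnt_stepUp o c t) p k
    (pvCnt o c t (k + 1)) (by omega)
    (by have := hcond k (by omega) (le_refl _); omega)
    (by omega)
  have hmk : m < k := by
    rcases Nat.eq_or_lt_of_le hm2 with hh | hh
    · subst hh; omega
    · exact hh
  have : ∃ x ∈ (List.range k).reverse,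
      (fun p => pvCnt o c t p == pvCnt o c t (k + 1)) x = true := by
    refine ⟨m, ?_, by simp only [hm3, beq_self_eq_true]⟩
    rw [List.mem_reverse, List.mem_range]
    exact hmk
  obtain ⟨r, hr⟩ := Option.isSome_iff_exists.mp (List.find?_isSome.mpr this)
  exact ⟨r, hr⟩

theorem stkSpec_pop {o c : Char} {t : List Char} {k r : Nat} (hoc : o ≠ c)
    (hkc : t[k]? = some c) (hmb : mB o c t k = some r) :
    stkSpec o c t k = stkSpec o c t (k + 1) ++ [((r : Nat) : Int)] := by
  obtain ⟨hrk, hRcnt, hRmin⟩ := mB_eq_some_iff.mp hmb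
  have hG := mB_gt hoc hkc hmb
  have hro := mB_open hoc hkc hmb
  have hdn : pvCnt o c t (k + 1) = pvCnt o c t k - 1 := pvCnt_down_of_close hoc hkc
  -- no stack entry strictly between r and k
  have hX : ∀ p, r < p → p < k → stkPred o c t k p = false := by
    intro p h1 h2
    by_contra hcon
    rw [Bool.not_eq_false] at hcon
    obtain ⟨hpo, hcond⟩ := stkPred_iff.mp hcon
    have g1 := hG p (by omega) (by omega)
    have g2 := hcond k (by omega) (le_refl _)
    omega
  have hY : stkPred o c t k r = true :=
    stkPred_iff.mpr ⟨hro, fun m hm1 hm2 => hG m hm1 hm2⟩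
  have hW : ∀ p, r ≤ p → p < k + 1 → stkPred o c t (k + 1) p = false := by
    intro p h1 h2
    by_contra hcon
    rw [Bool.not_eq_false] at hcon
    obtain ⟨hpo, hcond⟩ := stkPred_iff.mp hcon
    rcases Nat.eq_or_lt_of_le h1 with hh | hh
    · subst hh
      have := hcond (k + 1) (by omega) (le_refl _)
      omega
    · rcases Nat.lt_or_ge p k with hh2 | hh2
      · have := hX p hh hh2
        have hres : stkPred o c t k p = true := stkPred_iff.mpr
          ⟨hpo, fun m hm1 hm2 => hcond m hm1 (by omega)⟩
        rw [this] at hres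
        cases hres
      · have hpk : p = k := by omega
        subst hpk
        rw [hkc] at hpo
        have : c = o := by simpa using hpo
        exact hoc this.symm
  have hZ : ∀ p ∈ List.range r, stkPred o c t (k + 1) p = stkPred o c t k p := by
    intro p hp
    have hpr : p < r := List.mem_range.mp hp
    rw [Bool.eq_iff_iff, stkPred_iff, stkPred_iff]
    constructor
    · rintro ⟨h1, h2⟩
      exact ⟨h1, fun m hm1 hm2 => h2 m hm1 (by omega)⟩
    · rintro ⟨h1, h2⟩
      refine ⟨h1, fun m hm1 hm2 => ?_⟩
      rcases Nat.eq_or_lt_of_le hm2 with hm3 | hm3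
      · subst hm3
        have := h2 r (by omega) (by omega)
        omega
      · exact h2 m hm1 (by omega)
  -- split the ranges at r
  have hsplit : ∀ n, r ≤ n → List.range n = List.range r ++ List.range' r (n - r) := by
    intro n hn
    rw [List.range_eq_range', List.range_eq_range']
    have h1 := List.range'_append (s := 0) (m := r) (n := n - r) (step := 1)
    simp only [Nat.zero_add, Nat.one_mul] at h1
    have h0 : List.range' 0 n = List.range' 0 (r + (n - r)) := by
      congr 1
      omega
    rw [h0, ← h1]
  have hlk : List.filter (stkPred o c t k) (List.range' r (k - r)) = [r] := by
    have hkr : k - r = (k - r - 1) + 1 := by omega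
    rw [hkr, List.range'_succ, List.filter_cons, if_pos hY]
    have : List.filter (stkPred o c t k) (List.range' (r + 1) (k - r - 1)) = [] := by
      rw [List.filter_eq_nil_iff]
      intro p hp
      have := List.mem_range'_1.mp hp
      rw [hX p (by omega) (by omega)]
      simp
    rw [this]
  have hlk1 : List.filter (stkPred o c t (k + 1)) (List.range' r (k + 1 - r)) = [] := by
    rw [List.filter_eq_nil_iff]
    intro p hp
    have := List.mem_range'_1.mp hp
    rw [hW p (by omega) (by omega)]
    simp
  unfold stkSpec
  rw [hsplit k (by omega), hsplit (k + 1) (by omega), List.filter_append, List.filter_append,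
    hlk, hlk1, List.filter_congr hZ, List.append_nil, List.map_append]
  rfl

-- ---- the build fold invariant ----
def bstInv (t : List Char) (k : Nat) (st : PySem.Dict Int Int × PySem.Dict Char (List Int)) : Prop :=
  (∀ x : Char, st.2.contains x = fmcOpenList.contains x) ∧
  (∀ pr ∈ pvPairs, st.2.getD pr.1 [] = stkSpec pr.1 pr.2 t k) ∧
  (∀ pr ∈ pvPairs, ∀ ii j : Nat, t[ii]? = some pr.1 → mF pr.1 pr.2 t ii = some j →
    st.1.get? ((ii : Nat) : Int) = if j < k then some ((j : Nat) : Int) else none) ∧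
  (∀ pr ∈ pvPairs, ∀ jj r : Nat, t[jj]? = some pr.2 → mB pr.1 pr.2 t jj = some r →
    st.1.get? ((jj : Nat) : Int) = if jj < k then some ((r : Nat) : Int) else none)

theorem fsbStacks0_contains (x : Char) : fsbStacks0.contains x = fmcOpenList.contains x := by
  rw [Bool.eq_iff_iff]
  simp [fsbStacks0, fmcOpenList, PySem.Dict.contains_insert, PySem.Dict.contains_empty]
  tauto

theorem fsbOpenOf_contains (x : Char) : fsbOpenOf.contains x = fmcCloseList.contains x := by
  rw [Bool.eq_iff_iff]
  simp [fsbOpenOf, fmcCloseList, fmcOpenList, PySem.Dict.contains_insert, PySem.Dict.contains_empty]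
  tauto

theorem pvPairs_close_not_open : ∀ pr ∈ pvPairs, fmcOpenList.contains pr.2 = false := by decide
theorem pvPairs_open_contains : ∀ pr ∈ pvPairs, fmcOpenList.contains pr.1 = true := by decide
theorem pvPairs_openOf_get : ∀ pr ∈ pvPairs, fsbOpenOf.get? pr.2 = some pr.1 := by decide

theorem bstInv_zero (t : List Char) : bstInv t 0 (PySem.Dict.empty, fsbStacks0) := by
  refine ⟨fsbStacks0_contains, ?_, ?_, ?_⟩
  · intro pr hpr
    have hsp : stkSpec pr.1 pr.2 t 0 = [] := by simp [stkSpec]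
    rw [hsp]
    simp only [pvPairs, List.mem_cons, List.mem_singleton, List.not_mem_nil, or_false] at hpr
    rcases hpr with rfl | rfl | rfl | rfl | rfl | rfl | rfl | rfl <;> decide
  · intro pr hpr ii j h1 h2
    have hj : ¬ (j < 0) := by omega
    rw [if_neg hj, PySem.Dict.get?_empty]
  · intro pr hpr jj r h1 h2
    have hj : ¬ (jj < 0) := by omega
    rw [if_neg hj, PySem.Dict.get?_empty]

-- ---- more ground facts and small helpers ----
theorem pvPairs_cross : ∀ pr ∈ pvPairs, ∀ pr' ∈ pvPairs, pr.2 ≠ pr'.1 := by decide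

theorem pvContains_iff {l : List Char} {x : Char} : l.contains x = true ↔ x ∈ l := by
  simp

theorem pvCnt_succ_other {o c : Char} {t : List Char} {k : Nat}
    (h1 : t[k]? ≠ some o) (h2 : t[k]? ≠ some c) :
    pvCnt o c t (k + 1) = pvCnt o c t k := by
  rw [pvCnt_succ, if_neg h1, if_neg h2]
  omega

theorem pvPairs_opener_ne {pr pr' : Char × Char} (h : pr ∈ pvPairs) (h' : pr' ∈ pvPairs)
    (he : pr.1 = pr'.1) : pr = pr' := by
  rcases pvPairs_distinct pr h pr' h' with hh | hh
  · exact hh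
  · exact absurd he hh.1

theorem pvPairs_closer_ne {pr pr' : Char × Char} (h : pr ∈ pvPairs) (h' : pr' ∈ pvPairs)
    (he : pr.2 = pr'.2) : pr = pr' := by
  rcases pvPairs_distinct pr h pr' h' with hh | hh
  · exact hh
  · exact absurd he hh.2.2.2

-- ---- one step of B's build pass preserves the invariant ----
theorem bstInv_step (t : List Char) (k : Nat) (hk : k < t.length)
    (st : PySem.Dict Int Int × PySem.Dict Char (List Int)) (hinv : bstInv t k st) :
    bstInv t (k + 1) (fsbBuildStep st (((k : Nat) : Int), t[k])) := by
  obtain ⟨mate, stks⟩ := st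
  obtain ⟨h1, h2, h3, h4⟩ := hinv
  have htk : t[k]? = some t[k] := List.getElem?_eq_getElem hk
  by_cases hopen : t[k] ∈ fmcOpenList
  · -- opener: push k on its stack
    obtain ⟨pr0, hpr0, hch⟩ := pvOpen_mem_iff.mp hopen
    obtain ⟨hoc0, hdo0, hdc0⟩ := pvPairs_ne pr0 hpr0
    have hcont : stks.contains t[k] = true := by
      rw [h1, hch]
      exact pvPairs_open_contains pr0 hpr0
    have hred : fsbBuildStep (mate, stks) (((k : Nat) : Int), t[k]) =
        (mate, stks.insert t[k] (stks.getD t[k] [] ++ [((k : Nat) : Int)])) := by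
      simp [fsbBuildStep, hcont]
    rw [hred]
    have hko : t[k]? = some pr0.1 := by rw [htk, hch]
    refine ⟨?_, ?_, ?_, ?_⟩
    · intro x
      dsimp only
      rw [PySem.Dict.contains_insert, h1]
      by_cases hx : x = t[k]
      · subst hx
        rw [hch]
        rw [pvPairs_open_contains pr0 hpr0]
        simp
      · rw [beq_eq_false_iff_ne.mpr hx]
        simp
    · intro pr hpr
      dsimp only
      by_cases hpp : pr = pr0
      · rw [hpp, hch, PySem.Dict.getD_insert_self, h2 pr0 hpr0]
        exact (stkSpec_push hoc0 hko).symm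
      · have hne1 : pr.1 ≠ t[k] := by
          rw [hch]
          intro hcon
          exact hpp (pvPairs_opener_ne hpr hpr0 hcon)
        rw [PySem.Dict.getD_insert_of_ne _ _ _ hne1, h2 pr hpr]
        refine (stkSpec_neutral ?_ ?_).symm
        · refine pvCnt_succ_other ?_ ?_
          · rw [hko]
            intro hcon
            have hcon' := Option.some.inj hcon
            exact hne1 (by rw [hch, hcon'])
          · rw [hko]
            intro hcon
            have hcon' := Option.some.inj hcon
            exact pvPairs_cross pr hpr pr0 hpr0 hcon'.symm
        · rw [hko]
          intro hcon
          have hcon' := Option.some.inj hcon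
          exact hne1 (by rw [hch, hcon'])
    · intro pr hpr ii j hii hmf
      dsimp only
      rw [h3 pr hpr ii j hii hmf]
      have hjk : j ≠ k := by
        intro hcon
        subst hcon
        have hclo := mF_close (pvPairs_ne pr hpr).1 hii hmf
        rw [hko] at hclo
        exact pvPairs_cross pr hpr pr0 hpr0 (by simpa using hclo.symm)
      split_ifs <;> first | rfl | omega
    · intro pr hpr jj r hjj hmb
      dsimp only
      rw [h4 pr hpr jj r hjj hmb]
      have hjk : jj ≠ k := by
        intro hcon
        subst hcon
        rw [hko] at hjj
        exact pvPairs_cross pr hpr pr0 hpr0 (by simpa using hjj.symm)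
      split_ifs <;> first | rfl | omega
  by_cases hclose : t[k] ∈ fmcCloseList
  · -- closer: pop if the matching stack is nonempty
    obtain ⟨pr0, hpr0, hch⟩ := pvClose_mem_iff.mp hclose
    obtain ⟨hoc0, hdo0, hdc0⟩ := pvPairs_ne pr0 hpr0
    have hkc : t[k]? = some pr0.2 := by rw [htk, hch]
    have hcontF : stks.contains t[k] = false := by
      rw [h1, hch]
      exact pvPairs_close_not_open pr0 hpr0
    have hget : fsbOpenOf.get? t[k] = some pr0.1 := by
      rw [hch]
      exact pvPairs_openOf_get pr0 hpr0
    have hother : ∀ pr ∈ pvPairs, pr ≠ pr0 →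
        stkSpec pr.1 pr.2 t (k + 1) = stkSpec pr.1 pr.2 t k := by
      intro pr hpr hpp
      refine stkSpec_neutral ?_ ?_
      · refine pvCnt_succ_other ?_ ?_
        · rw [hkc]
          intro hcon
          have hcon' := Option.some.inj hcon
          exact pvPairs_cross pr0 hpr0 pr hpr hcon'
        · rw [hkc]
          intro hcon
          have hcon' := Option.some.inj hcon
          exact hpp (pvPairs_closer_ne hpr hpr0 hcon'.symm)
      · rw [hkc]
        intro hcon
        have hcon' := Option.some.inj hcon
        exact pvPairs_cross pr0 hpr0 pr hpr hcon'
    rcases hsp : stkSpec pr0.1 pr0.2 t k with _ | ⟨sa, sl⟩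
    · -- empty stack: unmatched closer, nothing happens
      have hred : fsbBuildStep (mate, stks) (((k : Nat) : Int), t[k]) = (mate, stks) := by
        simp [fsbBuildStep, hcontF, hget, h2 pr0 hpr0, hsp]
      rw [hred]
      have hnomB : ∀ r, mB pr0.1 pr0.2 t k ≠ some r := by
        intro r hcon
        have := mB_mem_stkSpec hoc0 hkc hcon
        rw [hsp] at this
        cases this
      refine ⟨h1, ?_, ?_, ?_⟩
      · intro pr hpr
        by_cases hpp : pr = pr0
        · subst hpp
          rw [h2 pr hpr, hsp]
          symm
          unfold stkSpec
          rw [List.map_eq_nil_iff, List.filter_eq_nil_iff]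
          intro p hp
          have hpk1 : p < k + 1 := List.mem_range.mp hp
          intro hcon
          obtain ⟨hpo, hcond⟩ := stkPred_iff.mp hcon
          by_cases hpk : p = k
          · subst hpk
            rw [hkc] at hpo
            exact (pvPairs_ne pr hpr).1 (by simpa using hpo.symm)
          · have hmem : stkPred pr.1 pr.2 t k p = true :=
              stkPred_iff.mpr ⟨hpo, fun m hm1 hm2 => hcond m hm1 (by omega)⟩
            have : ((p : Nat) : Int) ∈ stkSpec pr.1 pr.2 t k := by
              unfold stkSpec
              exact List.mem_map_of_mem (List.mem_filter.mpr ⟨List.mem_range.mpr (by omega), hmem⟩)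
            rw [hsp] at this
            cases this
        · rw [h2 pr hpr]
          exact (hother pr hpr hpp).symm
      · intro pr hpr ii j hii hmf
        rw [h3 pr hpr ii j hii hmf]
        have hjk : j ≠ k := by
          intro hcon
          subst hcon
          have hclo := mF_close (pvPairs_ne pr hpr).1 hii hmf
          rw [hkc] at hclo
          have hpp : pr = pr0 := pvPairs_closer_ne hpr hpr0 (by simpa using hclo.symm)
          subst hpp
          exact hnomB ii (mB_of_mF (pvPairs_ne pr hpr).1 hii hmf)
        split_ifs <;> first | rfl | omega
      · intro pr hpr jj r hjj hmb
        rw [h4 pr hpr jj r hjj hmb]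
        have hjk : jj ≠ k := by
          intro hcon
          subst hcon
          rw [hkc] at hjj
          have hpp : pr = pr0 := pvPairs_closer_ne hpr hpr0 (by simpa using hjj.symm)
          subst hpp
          exact hnomB r hmb
        split_ifs <;> first | rfl | omega
    · -- nonempty stack: pop the top, record the pair
      have hnemp : stkSpec pr0.1 pr0.2 t k ≠ [] := by rw [hsp]; simp
      obtain ⟨r, hr⟩ := stkSpec_nonempty_mB hoc0 hkc hnemp
      have hpop := stkSpec_pop hoc0 hkc hr
      obtain ⟨hrk, hRcnt, hRmin⟩ := mB_eq_some_iff.mp hr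
      have hro : t[r]? = some pr0.1 := mB_open hoc0 hkc hr
      have hlast : (stkSpec pr0.1 pr0.2 t k).getLast? = some ((r : Nat) : Int) := by
        rw [hpop]
        exact List.getLast?_concat
      have hdrop : (stkSpec pr0.1 pr0.2 t k).dropLast = stkSpec pr0.1 pr0.2 t (k + 1) := by
        rw [hpop]
        exact List.dropLast_concat
      have hred : fsbBuildStep (mate, stks) (((k : Nat) : Int), t[k]) =
          ((mate.insert ((r : Nat) : Int) ((k : Nat) : Int)).insert ((k : Nat) : Int) ((r : Nat) : Int),
            stks.insert pr0.1 (stkSpec pr0.1 pr0.2 t (k + 1))) := by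
        simp [fsbBuildStep, hcontF, hget, h2 pr0 hpr0, hlast, hdrop]
      rw [hred]
      have hrkInt : ((r : Nat) : Int) ≠ ((k : Nat) : Int) := by
        intro hcon
        have : r = k := by exact_mod_cast hcon
        omega
      refine ⟨?_, ?_, ?_, ?_⟩
      · intro x
        dsimp only
        rw [PySem.Dict.contains_insert, h1]
        by_cases hx : x = pr0.1
        · subst hx
          rw [pvPairs_open_contains pr0 hpr0]
          simp
        · rw [beq_eq_false_iff_ne.mpr hx]
          simp
      · intro pr hpr
        dsimp only
        by_cases hpp : pr = pr0
        · subst hpp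
          rw [PySem.Dict.getD_insert_self]
        · have hne1 : pr.1 ≠ pr0.1 := by
            intro hcon
            exact hpp (pvPairs_opener_ne hpr hpr0 hcon)
          rw [PySem.Dict.getD_insert_of_ne _ _ _ hne1, h2 pr hpr]
          exact (hother pr hpr hpp).symm
      · intro pr hpr ii j hii hmf
        dsimp only
        have hiik : ii ≠ k := by
          intro hcon
          subst hcon
          rw [hkc] at hii
          exact pvPairs_cross pr0 hpr0 pr hpr (by simpa using hii)
        by_cases hiir : ii = r
        · subst hiir
          have hpp : pr = pr0 := by
            apply pvPairs_opener_ne hpr hpr0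
            rw [hro] at hii
            simpa using hii.symm
          subst hpp
          have hmfr : mF pr.1 pr.2 t ii = some k := mF_of_mB (pvPairs_ne pr hpr).1 hkc hk hr
          rw [hmf] at hmfr
          have hjeq : j = k := by simpa using hmfr
          subst hjeq
          rw [PySem.Dict.get?_insert_of_ne _ _ hrkInt, PySem.Dict.get?_insert_self]
          rw [if_pos (by omega)]
        · have hiiInt : ((ii : Nat) : Int) ≠ ((k : Nat) : Int) := by
            intro hcon
            exact hiik (by exact_mod_cast hcon)
          have hiirInt : ((ii : Nat) : Int) ≠ ((r : Nat) : Int) := by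
            intro hcon
            exact hiir (by exact_mod_cast hcon)
          rw [PySem.Dict.get?_insert_of_ne _ _ hiiInt, PySem.Dict.get?_insert_of_ne _ _ hiirInt]
          rw [h3 pr hpr ii j hii hmf]
          have hjk : j ≠ k := by
            intro hcon
            subst hcon
            have hclo := mF_close (pvPairs_ne pr hpr).1 hii hmf
            rw [hkc] at hclo
            have hpp : pr = pr0 := pvPairs_closer_ne hpr hpr0 (by simpa using hclo.symm)
            subst hpp
            have := mB_of_mF (pvPairs_ne pr hpr).1 hii hmf
            rw [hr] at this
            exact hiir (by simpa using this.symm)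
          split_ifs <;> first | rfl | omega
      · intro pr hpr jj rr hjj hmb
        dsimp only
        by_cases hjjk : jj = k
        · subst hjjk
          have hpp : pr = pr0 := by
            apply pvPairs_closer_ne hpr hpr0
            rw [hkc] at hjj
            simpa using hjj.symm
          subst hpp
          rw [hr] at hmb
          have hrr : rr = r := by simpa using hmb.symm
          subst hrr
          rw [PySem.Dict.get?_insert_self, if_pos (by omega)]
        · have hjjr : jj ≠ r := by
            intro hcon
            subst hcon
            rw [hro] at hjj
            exact pvPairs_cross pr hpr pr0 hpr0 (by simpa using hjj.symm)
          have hjjInt : ((jj : Nat) : Int) ≠ ((k : Nat) : Int) := by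
            intro hcon
            exact hjjk (by exact_mod_cast hcon)
          have hjjrInt : ((jj : Nat) : Int) ≠ ((r : Nat) : Int) := by
            intro hcon
            exact hjjr (by exact_mod_cast hcon)
          rw [PySem.Dict.get?_insert_of_ne _ _ hjjInt, PySem.Dict.get?_insert_of_ne _ _ hjjrInt]
          rw [h4 pr hpr jj rr hjj hmb]
          split_ifs <;> first | rfl | omega
  · -- neither an opener nor a closer: nothing happens
    have hcontF : stks.contains t[k] = false := by
      rw [h1]
      rw [Bool.eq_false_iff]
      intro hcon
      exact hopen (pvContains_iff.mp hcon)
    have hgetN : fsbOpenOf.get? t[k] = none := by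
      have hc := fsbOpenOf_contains t[k]
      rw [PySem.Dict.contains_eq_isSome_get?] at hc
      have hcF : fmcCloseList.contains t[k] = false := by
        rw [Bool.eq_false_iff]
        intro hcon
        exact hclose (pvContains_iff.mp hcon)
      rw [hcF] at hc
      rcases hgo : fsbOpenOf.get? t[k] with _ | oc
      · rfl
      · rw [hgo] at hc
        cases hc
    have hred : fsbBuildStep (mate, stks) (((k : Nat) : Int), t[k]) = (mate, stks) := by
      simp [fsbBuildStep, hcontF, hgetN]
    rw [hred]
    have hnoto : ∀ pr ∈ pvPairs, t[k]? ≠ some pr.1 := by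
      intro pr hpr hcon
      rw [htk] at hcon
      apply hopen
      rw [fmcOpenList_eq_map]
      have : t[k] = pr.1 := by simpa using hcon
      rw [this]
      exact List.mem_map_of_mem hpr
    have hnotc : ∀ pr ∈ pvPairs, t[k]? ≠ some pr.2 := by
      intro pr hpr hcon
      rw [htk] at hcon
      apply hclose
      rw [fmcCloseList_eq_map]
      have : t[k] = pr.2 := by simpa using hcon
      rw [this]
      exact List.mem_map_of_mem hpr
    refine ⟨h1, ?_, ?_, ?_⟩
    · intro pr hpr
      rw [h2 pr hpr]
      exact (stkSpec_neutral (pvCnt_succ_other (hnoto pr hpr) (hnotc pr hpr)) (hnoto pr hpr)).symm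
    · intro pr hpr ii j hii hmf
      rw [h3 pr hpr ii j hii hmf]
      have hjk : j ≠ k := by
        intro hcon
        subst hcon
        exact hnotc pr hpr (mF_close (pvPairs_ne pr hpr).1 hii hmf)
      split_ifs <;> first | rfl | omega
    · intro pr hpr jj r hjj hmb
      rw [h4 pr hpr jj r hjj hmb]
      have hjk : jj ≠ k := by
        intro hcon
        subst hcon
        exact hnotc pr hpr hjj
      split_ifs <;> first | rfl | omega

theorem bstInv_final (t : List Char) :
    bstInv t t.length ((PySem.List.enumerate t 0).foldl fsbBuildStep (PySem.Dict.empty, fsbStacks0)) := by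
  suffices h : ∀ k, k ≤ t.length →
      bstInv t k (((PySem.List.enumerate t 0).take k).foldl fsbBuildStep (PySem.Dict.empty, fsbStacks0)) by
    have h2 := h t.length (le_refl _)
    rwa [List.take_of_length_le (by rw [PySem.List.length_enumerate])] at h2
  intro k
  induction k with
  | zero => intro _; simpa using bstInv_zero t
  | succ k ih =>
    intro hk1
    have hk : k < t.length := by omega
    have hgetk : (PySem.List.enumerate t 0)[k]? = some (((k : Nat) : Int), t[k]) := by
      rw [PySem.List.enumerate_eq_map_pyRange t ' ']
      rw [show PySem.List.len t = ((t.length : Nat) : Int) from by simp [pysem]]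
      rw [PySem.List.getElem?_map_pyRange_zero _ _ _ hk]
      rw [PySem.List.pyGetD_natCast]
      rw [List.getD_eq_getElem t ' ' hk]
    have htake : (PySem.List.enumerate t 0).take (k + 1) =
        (PySem.List.enumerate t 0).take k ++ [(((k : Nat) : Int), t[k])] := by
      rw [List.take_add_one, hgetk]
      rfl
    rw [htake, List.foldl_append]
    exact bstInv_step t k hk _ (ih (by omega))

-- ---- A's scan loops compute mF / mB ----
theorem fmcScanF_succ (t : List Char) (o c : Char) (fuel : Nat) (pos counter : Int) :
    fmcScanF t o c (fuel + 1) pos counter =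
      if counter > 0 then
        match PySem.List.pyGet? t (pos + 1) with
        | none => pos + 1
        | some ch => fmcScanF t o c fuel (pos + 1)
            (counter + (if ch = o then 1 else 0) - (if ch = c then 1 else 0))
      else pos := rfl

theorem fmcScanB_succ (t : List Char) (o c : Char) (fuel : Nat) (pos counter : Int) :
    fmcScanB t o c (fuel + 1) pos counter =
      if counter > 0 then
        match PySem.List.pyGet? t (pos - 1) with
        | none => pos - 1
        | some ch => fmcScanB t o c fuel (pos - 1)
            (counter + (if ch = c then 1 else 0) - (if ch = o then 1 else 0))
      else pos := rfl

theorem pvCnt_succ' {o c : Char} {t : List Char} {k : Nat} (hk : k < t.length) :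
    pvCnt o c t (k + 1) = pvCnt o c t k
      + (if t[k] = o then 1 else 0) - (if t[k] = c then 1 else 0) := by
  rw [pvCnt_succ, List.getElem?_eq_getElem hk]
  simp only [Option.some.injEq]

theorem scanF_run {o c : Char} {t : List Char} {i j : Nat} (hoc : o ≠ c)
    (hio : t[i]? = some o) (hij : mF o c t i = some j) :
    ∀ fuel m, i ≤ m → m ≤ j → j - m ≤ fuel →
      fmcScanF t o c fuel ((m : Nat) : Int) (pvCnt o c t (m + 1) - pvCnt o c t i)
        = ((j : Nat) : Int) := by
  obtain ⟨hij1, hj2, hIcnt, hImin⟩ := mF_eq_some_iff.mp hij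
  have hG := mF_gt hoc hio hij
  intro fuel
  induction fuel with
  | zero =>
    intro m h1 h2 h3
    have hmj : m = j := by omega
    subst hmj
    rfl
  | succ fuel ih =>
    intro m h1 h2 h3
    by_cases hmj : m = j
    · rw [hmj]
      have hc0 : pvCnt o c t (j + 1) - pvCnt o c t i = 0 := by omega
      rw [hc0, fmcScanF_succ, if_neg (by omega)]
    · have hmj' : m < j := by omega
      have hcpos : pvCnt o c t (m + 1) - pvCnt o c t i > 0 := by
        have := hG (m + 1) (by omega) (by omega)
        omega
      have hml : m + 1 < t.length := by omega
      have hcast : ((m : Nat) : Int) + 1 = (((m + 1 : Nat)) : Int) := by push_cast; ring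
      have hget : PySem.List.pyGet? t (((m : Nat) : Int) + 1) = some t[m + 1] := by
        rw [hcast, PySem.List.pyGet?_natCast]
        exact List.getElem?_eq_getElem hml
      have hstep2 : fmcScanF t o c (fuel + 1) ((m : Nat) : Int)
            (pvCnt o c t (m + 1) - pvCnt o c t i)
          = fmcScanF t o c fuel (((m : Nat) : Int) + 1)
            (pvCnt o c t (m + 1) - pvCnt o c t i
              + (if t[m + 1] = o then 1 else 0) - (if t[m + 1] = c then 1 else 0)) := by
        rw [fmcScanF_succ, if_pos hcpos, hget]
      have hcnt' : pvCnt o c t (m + 1) - pvCnt o c t i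
            + (if t[m + 1] = o then (1 : Int) else 0) - (if t[m + 1] = c then (1 : Int) else 0)
          = pvCnt o c t (m + 1 + 1) - pvCnt o c t i := by
        rw [pvCnt_succ' hml]
        ring
      rw [hstep2, hcast, hcnt']
      exact ih (m + 1) (by omega) (by omega) (by omega)

theorem scanB_run {o c : Char} {t : List Char} {j r : Nat} (hoc : o ≠ c)
    (hjc : t[j]? = some c) (hjl : j < t.length) (hjr : mB o c t j = some r) :
    ∀ fuel m, r ≤ m → m ≤ j → m - r ≤ fuel →
      fmcScanB t o c fuel ((m : Nat) : Int) (pvCnt o c t m - pvCnt o c t (j + 1))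
        = ((r : Nat) : Int) := by
  obtain ⟨hrj, hRcnt, hRmin⟩ := mB_eq_some_iff.mp hjr
  have hG := mB_gt hoc hjc hjr
  intro fuel
  induction fuel with
  | zero =>
    intro m h1 h2 h3
    have hmr : m = r := by omega
    subst hmr
    rfl
  | succ fuel ih =>
    intro m h1 h2 h3
    by_cases hmr : m = r
    · rw [hmr]
      have hc0 : pvCnt o c t r - pvCnt o c t (j + 1) = 0 := by omega
      rw [hc0, fmcScanB_succ, if_neg (by omega)]
    · have hmr' : r < m := by omega
      have hcpos : pvCnt o c t m - pvCnt o c t (j + 1) > 0 := by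
        have := hG m (by omega) (by omega)
        omega
      have hml : m - 1 < t.length := by omega
      have hm1 : m - 1 + 1 = m := by omega
      have hcast : ((m : Nat) : Int) - 1 = (((m - 1 : Nat)) : Int) := by
        have : (1 : Int) ≤ ((m : Nat) : Int) := by exact_mod_cast Nat.one_le_iff_ne_zero.mpr (by omega)
        push_cast [Nat.cast_sub (by omega : 1 ≤ m)]
        ring
      have hget : PySem.List.pyGet? t (((m : Nat) : Int) - 1) = some t[m - 1] := by
        rw [hcast, PySem.List.pyGet?_natCast]
        exact List.getElem?_eq_getElem hml
      have hstep2 : fmcScanB t o c (fuel + 1) ((m : Nat) : Int)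
            (pvCnt o c t m - pvCnt o c t (j + 1))
          = fmcScanB t o c fuel (((m : Nat) : Int) - 1)
            (pvCnt o c t m - pvCnt o c t (j + 1)
              + (if t[m - 1] = c then 1 else 0) - (if t[m - 1] = o then 1 else 0)) := by
        rw [fmcScanB_succ, if_pos hcpos, hget]
      have hcnt' : pvCnt o c t m - pvCnt o c t (j + 1)
            + (if t[m - 1] = c then (1 : Int) else 0) - (if t[m - 1] = o then (1 : Int) else 0)
          = pvCnt o c t (m - 1) - pvCnt o c t (j + 1) := by
        have hstep := pvCnt_succ' (o := o) (c := c) hml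
        rw [hm1] at hstep
        rw [hstep]
        ring
      rw [hstep2, hcast, hcnt']
      exact ih (m - 1) (by omega) (by omega) (by omega)

-- ---- find_matching_char dispatch ----
theorem fmc_open {pr : Char × Char} (hpr : pr ∈ pvPairs) {t : List Char} {i j : Nat}
    (hio : t[i]? = some pr.1) (hij : mF pr.1 pr.2 t i = some j) :
    find_matching_char pr.1 t ((i : Nat) : Int) = ((j : Nat) : Int) := by
  obtain ⟨hij1, hj2, _, _⟩ := mF_eq_some_iff.mp hij
  obtain ⟨hoc, _, _⟩ := pvPairs_ne pr hpr
  have hrun := scanF_run hoc hio hij (2 * t.length + 2) i (le_refl _) (by omega) (by omega)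
  have hone : pvCnt pr.1 pr.2 t (i + 1) - pvCnt pr.1 pr.2 t i = 1 := by
    have := pvCnt_up_of_open hoc hio
    omega
  rw [hone] at hrun
  simp only [pvPairs, List.mem_cons, List.mem_singleton, List.not_mem_nil, or_false] at hpr
  rcases hpr with rfl | rfl | rfl | rfl | rfl | rfl | rfl | rfl <;> exact hrun

theorem fmc_close {pr : Char × Char} (hpr : pr ∈ pvPairs) {t : List Char} {j r : Nat}
    (hjc : t[j]? = some pr.2) (hjl : j < t.length) (hjr : mB pr.1 pr.2 t j = some r) :
    find_matching_char pr.2 t ((j : Nat) : Int) = ((r : Nat) : Int) := by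
  obtain ⟨hrj, _, _⟩ := mB_eq_some_iff.mp hjr
  obtain ⟨hoc, _, _⟩ := pvPairs_ne pr hpr
  have hrun := scanB_run hoc hjc hjl hjr (2 * t.length + 2) j (by omega) (le_refl _) (by omega)
  have hone : pvCnt pr.1 pr.2 t j - pvCnt pr.1 pr.2 t (j + 1) = 1 := by
    have := pvCnt_down_of_close hoc hjc
    omega
  rw [hone] at hrun
  simp only [pvPairs, List.mem_cons, List.mem_singleton, List.not_mem_nil, or_false] at hpr
  rcases hpr with rfl | rfl | rfl | rfl | rfl | rfl | rfl | rfl <;> exact hrun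

theorem fmc_none {ch : Char} (ho : ch ∉ fmcOpenList) (hc : ch ∉ fmcCloseList)
    (t : List Char) (ip : Int) : find_matching_char ch t ip = ip := by
  unfold find_matching_char
  rw [if_neg, if_neg]
  · intro hcon
    exact hc (pvContains_iff.mp hcon)
  · intro hcon
    exact ho (pvContains_iff.mp hcon)

-- ---- the two inner-loop bodies agree on reachable texts ----
theorem pvSliceDot (t : List Char) (k : Nat) (hk : k < t.length) :
    PySem.List.slice t none (some ((k : Nat) : Int)) ++ '.' ::
      PySem.List.slice t (some (((k : Nat) : Int) + 1)) none = t.set k '.' := by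
  rw [PySem.List.slice_to_natCast]
  rw [show ((k : Nat) : Int) + 1 = (((k + 1 : Nat)) : Int) by push_cast; ring]
  rw [PySem.List.slice_from_natCast]
  rw [List.set_eq_take_append_cons_drop, if_pos hk]

theorem pvRel_intro {cs : List (Int × Int)} {t0 : List Char} {pr : Char × Char}
    {a b : Int} (hab : (a, b) ∈ cs) {ii : Nat} (hi1 : a + 1 ≤ ((ii : Nat) : Int))
    (hi2 : ((ii : Nat) : Int) < b - 1) (hil : ii < t0.length)
    (hch : t0[ii]? = some pr.1 ∨ t0[ii]? = some pr.2) : pvRelevantB cs t0 pr = true := by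
  unfold pvRelevantB
  rw [List.any_eq_true]
  refine ⟨(a, b), hab, ?_⟩
  rw [List.any_eq_true]
  refine ⟨ii, List.mem_range.mpr hil, ?_⟩
  have hgd : t0.getD ii ' ' = t0[ii] := List.getD_eq_getElem t0 ' ' hil
  have hc : t0[ii] = pr.1 ∨ t0[ii] = pr.2 := by
    rcases hch with h | h
    · left
      rw [List.getElem?_eq_getElem hil] at h
      exact Option.some.inj h
    · right
      rw [List.getElem?_eq_getElem hil] at h
      exact Option.some.inj h
  simp only [Bool.and_eq_true, decide_eq_true_eq, Bool.or_eq_true, beq_iff_eq, hgd]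
  exact ⟨⟨hi1, hi2⟩, hc⟩

theorem pvStepEq
    (cs : List (Int × Int)) (t0 : List Char)
    (mate : PySem.Dict Int Int) (stks : PySem.Dict Char (List Int))
    (HB : ∀ p ∈ cs, p.1 + 3 ≤ p.2 → 0 ≤ p.1 ∧ p.2 ≤ (t0.length : Int))
    (HBal : ∀ pr ∈ pvPairs, pvRelevantB cs t0 pr = true → pvBalP pr.1 pr.2 t0)
    (Hstks : ∀ x : Char, stks.contains x = fmcOpenList.contains x)
    (Hmo : ∀ pr ∈ pvPairs, ∀ ii j : Nat, t0[ii]? = some pr.1 → mF pr.1 pr.2 t0 ii = some j →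
        mate.get? ((ii : Nat) : Int) = some ((j : Nat) : Int))
    (Hmc : ∀ pr ∈ pvPairs, ∀ jj r : Nat, t0[jj]? = some pr.2 → mB pr.1 pr.2 t0 jj = some r →
        mate.get? ((jj : Nat) : Int) = some ((r : Nat) : Int))
    {a b : Int} (hab : (a, b) ∈ cs) {i : Int} (hi1 : a + 1 ≤ i) (hi2 : i < b - 1)
    {t : List Char} (hre : pvReach t0 cs t) :
    fsAStep cs t i = fsbStep cs mate stks t i ∧ pvReach t0 cs (fsAStep cs t i) := by
  have hbou := HB (a, b) hab (by omega)
  have hlen : t.length = t0.length := pvReach_length hre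
  have h0i : 0 ≤ i := by omega
  obtain ⟨ii, rfl⟩ : ∃ ii : Nat, i = ((ii : Nat) : Int) := ⟨i.toNat, (Int.toNat_of_nonneg h0i).symm⟩
  have hil : ii < t.length := by omega
  have hil0 : ii < t0.length := by omega
  have htich : t[ii]? = some t[ii] := List.getElem?_eq_getElem hil
  have hget : PySem.List.pyGet? t ((ii : Nat) : Int) = some t[ii] := by
    rw [PySem.List.pyGet?_natCast]
    exact htich
  by_cases hdot : ['.', '(', ')'].contains t[ii] = true
  · have hAeq : fsAStep cs t ((ii : Nat) : Int) = t := by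
      simp only [fsAStep, hget]
      rw [if_pos hdot]
    have hBeq : fsbStep cs mate stks t ((ii : Nat) : Int) = t := by
      simp only [fsbStep, hget]
      rw [if_pos hdot]
    rw [hAeq, hBeq]
    exact ⟨rfl, hre⟩
  have hdotB : ['.', '(', ')'].contains t[ii] = false := by
    rw [Bool.eq_false_iff]
    exact hdot
  have hchne : t[ii] ≠ '.' := by
    intro h
    apply hdot
    rw [h]
    decide
  have hch0 : t0[ii]? = some t[ii] := pvReach_char hre ii t[ii] htich hchne
  by_cases hopen : t[ii] ∈ fmcOpenList
  · -- an opening bracket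
    obtain ⟨pr, hpr, hch⟩ := pvOpen_mem_iff.mp hopen
    have hiot : t[ii]? = some pr.1 := by rw [htich, hch]
    have hio0 : t0[ii]? = some pr.1 := by rw [hch0, hch]
    have hrel : pvRelevantB cs t0 pr = true :=
      pvRel_intro hab hi1 hi2 hil0 (Or.inl hio0)
    obtain ⟨j, hjt, hj0⟩ := pvReach_mF hre HBal pr hpr hrel ii hiot
    obtain ⟨hij1, hj2, _, _⟩ := mF_eq_some_iff.mp hjt
    have hA : find_matching_char t[ii] t ((ii : Nat) : Int) = ((j : Nat) : Int) := by
      rw [hch]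
      exact fmc_open hpr hiot hjt
    have hBj : mate.get? ((ii : Nat) : Int) = some ((j : Nat) : Int) := Hmo pr hpr ii j hio0 hj0
    have hcont : (stks.contains t[ii] || fsbOpenOf.contains t[ii]) = true := by
      rw [Hstks, hch, pvPairs_open_contains pr hpr]
      simp
    have hAstep : fsAStep cs t ((ii : Nat) : Int) =
        (if cs.all (fun pair => decide (¬ (pair.1 ≤ ((j : Nat) : Int) ∧ ((j : Nat) : Int) < pair.2)))
          then (t.set ii '.').set j '.' else t) := by
      simp only [fsAStep, hget]
      rw [if_neg (by rw [hdotB]; exact Bool.false_ne_true), hA]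
      rw [pvSliceDot t ii hil]
      rw [pvSliceDot (t.set ii '.') j (by simpa using hj2)]
    have hBstep : fsbStep cs mate stks t ((ii : Nat) : Int) =
        (if cs.all (fun pair => decide (¬ (pair.1 ≤ ((j : Nat) : Int) ∧ ((j : Nat) : Int) < pair.2)))
          then (t.set ii '.').set j '.' else t) := by
      simp only [fsbStep, hget]
      rw [if_neg (by rw [hdotB]; exact Bool.false_ne_true), if_pos hcont, hBj]
      dsimp only
      rw [PySem.List.pySetD_natCast, PySem.List.pySetD_natCast]
    refine ⟨hAstep.trans hBstep.symm, ?_⟩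
    rw [hAstep]
    split_ifs
    · exact pvReach.step hre hpr hrel hiot hjt
    · exact hre
  by_cases hclose : t[ii] ∈ fmcCloseList
  · -- a closing bracket
    obtain ⟨pr, hpr, hch⟩ := pvClose_mem_iff.mp hclose
    have hict : t[ii]? = some pr.2 := by rw [htich, hch]
    have hic0 : t0[ii]? = some pr.2 := by rw [hch0, hch]
    have hrel : pvRelevantB cs t0 pr = true :=
      pvRel_intro hab hi1 hi2 hil0 (Or.inr hic0)
    obtain ⟨r, hrt, hr0⟩ := pvReach_mB hre HBal pr hpr hrel ii hict
    obtain ⟨hrj, _, _⟩ := mB_eq_some_iff.mp hrt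
    have hoc := (pvPairs_ne pr hpr).1
    have hrot : t[r]? = some pr.1 := mB_open hoc hict hrt
    have hmfr : mF pr.1 pr.2 t r = some ii := mF_of_mB hoc hict hil hrt
    have hA : find_matching_char t[ii] t ((ii : Nat) : Int) = ((r : Nat) : Int) := by
      rw [hch]
      exact fmc_close hpr hict hil hrt
    have hBr : mate.get? ((ii : Nat) : Int) = some ((r : Nat) : Int) := Hmc pr hpr ii r hic0 hr0
    have hcont : (stks.contains t[ii] || fsbOpenOf.contains t[ii]) = true := by
      rw [Hstks, hch, fsbOpenOf_contains]
      have hm : pr.2 ∈ fmcCloseList := by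
        rw [fmcCloseList_eq_map]
        exact List.mem_map_of_mem hpr
      rw [pvContains_iff.mpr hm]
      simp
    have hAstep : fsAStep cs t ((ii : Nat) : Int) =
        (if cs.all (fun pair => decide (¬ (pair.1 ≤ ((r : Nat) : Int) ∧ ((r : Nat) : Int) < pair.2)))
          then (t.set ii '.').set r '.' else t) := by
      simp only [fsAStep, hget]
      rw [if_neg (by rw [hdotB]; exact Bool.false_ne_true), hA]
      rw [pvSliceDot t ii hil]
      rw [pvSliceDot (t.set ii '.') r (by simp; omega)]
    have hBstep : fsbStep cs mate stks t ((ii : Nat) : Int) =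
        (if cs.all (fun pair => decide (¬ (pair.1 ≤ ((r : Nat) : Int) ∧ ((r : Nat) : Int) < pair.2)))
          then (t.set ii '.').set r '.' else t) := by
      simp only [fsbStep, hget]
      rw [if_neg (by rw [hdotB]; exact Bool.false_ne_true), if_pos hcont, hBr]
      dsimp only
      rw [PySem.List.pySetD_natCast, PySem.List.pySetD_natCast]
    refine ⟨hAstep.trans hBstep.symm, ?_⟩
    rw [hAstep]
    split_ifs
    · rw [List.set_comm _ _ (by omega)]
      exact pvReach.step hre hpr hrel hrot hmfr
    · exact hre
  · -- not a bracket: neither side changes anything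
    have hA : find_matching_char t[ii] t ((ii : Nat) : Int) = ((ii : Nat) : Int) :=
      fmc_none hopen hclose t _
    have hallF : cs.all (fun pair => decide (¬ (pair.1 ≤ ((ii : Nat) : Int) ∧ ((ii : Nat) : Int) < pair.2))) = false := by
      rw [List.all_eq_false]
      refine ⟨(a, b), hab, ?_⟩
      simp only [Bool.not_eq_true, decide_eq_false_iff_not, not_not]
      exact ⟨by omega, by omega⟩
    have hcontF : (stks.contains t[ii] || fsbOpenOf.contains t[ii]) = false := by
      rw [Hstks, fsbOpenOf_contains]
      have h1 : fmcOpenList.contains t[ii] = false := by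
        rw [Bool.eq_false_iff]
        intro hcon
        exact hopen (pvContains_iff.mp hcon)
      have h2 : fmcCloseList.contains t[ii] = false := by
        rw [Bool.eq_false_iff]
        intro hcon
        exact hclose (pvContains_iff.mp hcon)
      rw [h1, h2]
      rfl
    have hAeq : fsAStep cs t ((ii : Nat) : Int) = t := by
      simp only [fsAStep, hget]
      rw [if_neg (by rw [hdotB]; exact Bool.false_ne_true), hA, hallF]
      rw [if_neg (by exact Bool.false_ne_true)]
    have hBeq : fsbStep cs mate stks t ((ii : Nat) : Int) = t := by
      simp only [fsbStep, hget]
      rw [if_neg (by rw [hdotB]; exact Bool.false_ne_true), if_neg (by rw [hcontF]; exact Bool.false_ne_true)]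
    rw [hAeq, hBeq]
    exact ⟨rfl, hre⟩

theorem pvFoldEq
    (cs : List (Int × Int)) (t0 : List Char)
    (mate : PySem.Dict Int Int) (stks : PySem.Dict Char (List Int))
    (HB : ∀ p ∈ cs, p.1 + 3 ≤ p.2 → 0 ≤ p.1 ∧ p.2 ≤ (t0.length : Int))
    (HBal : ∀ pr ∈ pvPairs, pvRelevantB cs t0 pr = true → pvBalP pr.1 pr.2 t0)
    (Hstks : ∀ x : Char, stks.contains x = fmcOpenList.contains x)
    (Hmo : ∀ pr ∈ pvPairs, ∀ ii j : Nat, t0[ii]? = some pr.1 → mF pr.1 pr.2 t0 ii = some j →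
        mate.get? ((ii : Nat) : Int) = some ((j : Nat) : Int))
    (Hmc : ∀ pr ∈ pvPairs, ∀ jj r : Nat, t0[jj]? = some pr.2 → mB pr.1 pr.2 t0 jj = some r →
        mate.get? ((jj : Nat) : Int) = some ((r : Nat) : Int))
    {a b : Int} (hab : (a, b) ∈ cs) :
    ∀ (l : List Int), (∀ x ∈ l, a + 1 ≤ x ∧ x < b - 1) → ∀ t, pvReach t0 cs t →
      (l.foldl (fsAStep cs) t = l.foldl (fsbStep cs mate stks) t ∧
        pvReach t0 cs (l.foldl (fsAStep cs) t)) := by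
  intro l
  induction l with
  | nil => exact fun _ t h => ⟨rfl, h⟩
  | cons x l ih =>
    intro hmem t hre
    obtain ⟨heq, hre'⟩ := pvStepEq cs t0 mate stks HB HBal Hstks Hmo Hmc hab
      (hmem x List.mem_cons_self).1 (hmem x List.mem_cons_self).2 hre
    rw [List.foldl_cons, List.foldl_cons, ← heq]
    exact ih (fun y hy => hmem y (List.mem_cons_of_mem _ hy)) _ hre'

theorem pvLoopEq
    (cs : List (Int × Int)) (t0 : List Char)
    (mate : PySem.Dict Int Int) (stks : PySem.Dict Char (List Int))
    (HB : ∀ p ∈ cs, p.1 + 3 ≤ p.2 → 0 ≤ p.1 ∧ p.2 ≤ (t0.length : Int))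
    (HBal : ∀ pr ∈ pvPairs, pvRelevantB cs t0 pr = true → pvBalP pr.1 pr.2 t0)
    (Hstks : ∀ x : Char, stks.contains x = fmcOpenList.contains x)
    (Hmo : ∀ pr ∈ pvPairs, ∀ ii j : Nat, t0[ii]? = some pr.1 → mF pr.1 pr.2 t0 ii = some j →
        mate.get? ((ii : Nat) : Int) = some ((j : Nat) : Int))
    (Hmc : ∀ pr ∈ pvPairs, ∀ jj r : Nat, t0[jj]? = some pr.2 → mB pr.1 pr.2 t0 jj = some r →
        mate.get? ((jj : Nat) : Int) = some ((r : Nat) : Int)) :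
    ∀ (rest : List (Int × Int)), (∀ x ∈ rest, x ∈ cs) →
      ∀ (acc : List String) (t : List Char), pvReach t0 cs t →
        fsALoop cs rest acc t = fsbLoop cs mate stks rest acc t := by
  intro rest
  induction rest with
  | nil => intro _ acc t _; rfl
  | cons con rest ih =>
    intro hmem acc t hre
    obtain ⟨a, b⟩ := con
    have hab : (a, b) ∈ cs := hmem (a, b) List.mem_cons_self
    by_cases hend : b - 1 = a + 1
    · simp only [fsALoop, fsbLoop, hend, if_pos]
    · obtain ⟨heq, hre'⟩ := pvFoldEq cs t0 mate stks HB HBal Hstks Hmo Hmc hab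
        (PySem.List.pyRange (a + 1) (b - 1) 1)
        (fun x hx => PySem.List.mem_pyRange_one.mp hx) t hre
      simp only [fsALoop, fsbLoop, hend, if_neg, if_false]
      rw [← heq]
      exact ih (fun y hy => hmem y (List.mem_cons_of_mem _ hy)) _ _ hre'

-- ===== VERDICT (by name: the statement is the Claim_ definition above) =====
theorem fill_secondary_spec : Claim_equal_fill_secondary := by
  intro cs text hdom hpre
  unfold Spec_fill_secondary
  obtain ⟨HB, HBal'⟩ := hpre
  have HBal : ∀ pr ∈ pvPairs, pvRelevantB cs text.toList pr = true → pvBalP pr.1 pr.2 text.toList :=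
    fun pr hpr hrel => pvBalancedB_iff.mp (HBal' pr hpr hrel)
  obtain ⟨h1, h2, h3, h4⟩ := bstInv_final text.toList
  have Hmo : ∀ pr ∈ pvPairs, ∀ ii j : Nat, text.toList[ii]? = some pr.1 →
      mF pr.1 pr.2 text.toList ii = some j →
      ((PySem.List.enumerate text.toList 0).foldl fsbBuildStep
        (PySem.Dict.empty, fsbStacks0)).1.get? ((ii : Nat) : Int) = some ((j : Nat) : Int) := by
    intro pr hpr ii j hii hmf
    rw [h3 pr hpr ii j hii hmf, if_pos (mF_eq_some_iff.mp hmf).2.1]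
  have Hmc : ∀ pr ∈ pvPairs, ∀ jj r : Nat, text.toList[jj]? = some pr.2 →
      mB pr.1 pr.2 text.toList jj = some r →
      ((PySem.List.enumerate text.toList 0).foldl fsbBuildStep
        (PySem.Dict.empty, fsbStacks0)).1.get? ((jj : Nat) : Int) = some ((r : Nat) : Int) := by
    intro pr hpr jj r hjj hmb
    have hjl : jj < text.toList.length := by
      by_contra hcon
      rw [List.getElem?_eq_none (by omega)] at hjj
      cases hjj
    rw [h4 pr hpr jj r hjj hmb, if_pos hjl]
  show fill_secondary cs text = fill_secondary_alt cs text
  unfold fill_secondary fill_secondary_alt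
  exact pvLoopEq cs text.toList _ _ HB HBal h1 Hmo Hmc cs (fun x hx => hx) [] text.toList pvReach.refl
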